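-- pv_equiv track=rewrite | github.com/824zzy/Leetcode | S_Math/Algebra/Prime/L3_1998_GCD_Sort_of_an_Array.py | gcdSort
-- ===== SOURCE A (Python) =====
-- from typing import List
--
-- class DSU:
--     def __init__(self, n):
--         self.p = [i for i in range(n)]
--
--     def find(self, u):
--         if self.p[u]!=u: self.p[u] = self.find(self.p[u])
--         return self.p[u]
--
--     def union(self, x, y):
--         self.p[self.find(x)] = self.find(y)
--
-- def gcdSort(A: List[int]) -> bool:
--     m = max(A)
--     dsu = DSU(m+1)
--     seen = set(A)
--     # modified sieve of eratosthenes
--     sieve = [1]*(m+1)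
--     sieve[0] = sieve[1] = 0
--     for k in range(m//2+1):
--         if sieve[k]:
--             for x in range(2*k, m+1, k):
--                 sieve[x] = 0
--                 if x in seen: dsu.union(k, x)
--
--     return all(dsu.find(x) == dsu.find(y) for x, y in zip(A, sorted(A)))
-- ===== SOURCE B (Python) =====
-- from typing import List
--
-- def gcdSort(A: List[int]) -> bool:
--     m = max(A)
--     # union-find over values 0..m (iterative find, no path compression)
--     p = list(range(m + 1))
--
--     def find(u):
--         while p[u] != u:
--             u = p[u]
--         return u
--
--     def union(a, b):
--         p[find(a)] = find(b)
--
--     # factor each distinct value by trial division; union it with each prime factor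
--     for v in set(A):
--         x, d = v, 2
--         while d * d <= x:
--             if x % d == 0:
--                 union(v, d)
--                 while x % d == 0:
--                     x //= d
--             d += 1
--         if x > 1:
--             union(v, x)
--
--     return all(find(a) == find(b) for a, b in zip(A, sorted(A)))
-- ===== Notes on version B (the rewrite author's own statement) =====
-- stated objective: alternative
-- what changed: Replaces A's global prime-times-multiples sieve traversal feeding a recursive path-compressing DSU by per-distinct-value trial-division factorization (union each value with each of its prime factors) feeding a plain iterative DSU without path compression; the final sorted-zip root comparison is kept.
import Mathlib
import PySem

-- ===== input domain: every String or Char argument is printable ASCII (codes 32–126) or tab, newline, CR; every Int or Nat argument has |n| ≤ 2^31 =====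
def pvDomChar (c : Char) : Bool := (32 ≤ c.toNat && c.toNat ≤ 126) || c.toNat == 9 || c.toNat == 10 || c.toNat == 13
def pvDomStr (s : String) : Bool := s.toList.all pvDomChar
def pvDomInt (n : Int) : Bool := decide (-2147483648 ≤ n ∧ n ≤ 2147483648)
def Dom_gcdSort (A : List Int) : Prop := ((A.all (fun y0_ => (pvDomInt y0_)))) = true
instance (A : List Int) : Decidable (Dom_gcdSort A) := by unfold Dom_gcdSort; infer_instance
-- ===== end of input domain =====

-- B replaces A's prime-times-multiples sieve traversal (feeding a recursive path-compressing DSU)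
-- by per-distinct-value trial-division factorization feeding a plain iterative DSU: an alternative
-- algorithm of similar cost.  Both mutate only internal state; the claim is about the return value.

-- ===== PORT A =====
-- DSU.find: recursive, with path compression.  Recursion fuel = parent-list length (always
-- sufficient on the acyclic parent arrays the program builds; exact there).
def pvFindA : Nat → List Int → Int → List Int × Int
  | 0, p, u => (p, u)
  | fuel+1, p, u =>
    let pu := PySem.List.pyGetD p u 0          -- self.p[u]  (index in range under Pre_)
    if pu ≠ u then
      let r := pvFindA fuel p pu               -- self.p[u] = self.find(self.p[u])
      let p2 := PySem.List.pySetD r.1 u r.2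
      (p2, PySem.List.pyGetD p2 u 0)           -- return self.p[u]
    else (p, pu)

-- DSU.union: Python evaluates the RHS find(y) first, then the target index find(x)
def pvUnionA (p : List Int) (x y : Int) : List Int :=
  let ry := pvFindA (p.length + 1) p y
  let rx := pvFindA (ry.1.length + 1) ry.1 x
  PySem.List.pySetD rx.1 rx.2 ry.2

-- all(dsu.find(x) == dsu.find(y) for x, y in zip(A, sorted(A)))  (short-circuits; threads dsu state)
def pvAllFindA : List Int → List (Int × Int) → Bool
  | _, [] => true
  | p, (a, b) :: rest =>
    let ra := pvFindA (p.length + 1) p a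
    let rb := pvFindA (ra.1.length + 1) ra.1 b
    if ra.2 = rb.2 then pvAllFindA rb.1 rest else false

def gcdSort (A : List Int) : Bool :=
  match PySem.List.max? A (fun v => v) with
  | none => false                                           -- max([]) raises ValueError: outside Pre_
  | some m =>
    let p0 : List Int := PySem.List.pyRange 0 (m+1) 1       -- DSU.p = [i for i in range(m+1)]
    let seen := PySem.Set.ofList A
    let sieve0 : List Int := List.replicate ((m+1).toNat) 1 -- [1]*(m+1)
    let sieve1 := PySem.List.pySetD (PySem.List.pySetD sieve0 0 0) 1 0  -- sieve[0]=sieve[1]=0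
    let st := (PySem.List.pyRange 0 (PySem.Int.floordiv m 2 + 1) 1).foldl
      (fun (st : List Int × List Int) k =>
        if PySem.List.pyGetD st.1 k 0 ≠ 0 then              -- if sieve[k]:
          (PySem.List.pyRange (2*k) (m+1) k).foldl
            (fun (st2 : List Int × List Int) x =>
              let sieve := PySem.List.pySetD st2.1 x 0      -- sieve[x] = 0
              if PySem.Set.contains seen x then             -- if x in seen: dsu.union(k, x)
                (sieve, pvUnionA st2.2 k x)
              else (sieve, st2.2)) st
        else st) (sieve1, p0)
    pvAllFindA st.2 (A.zip (PySem.List.sorted A (fun v => v) false))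

-- ===== PORT B =====
-- find: iterative chase to the root, no mutation (fuel = list length, sufficient on acyclic arrays)
def pvFindB : Nat → List Int → Int → Int
  | 0, _, u => u
  | fuel+1, p, u =>
    let pu := PySem.List.pyGetD p u 0
    if pu ≠ u then pvFindB fuel p pu else u

def pvUnionB (p : List Int) (a b : Int) : List Int :=       -- p[find(a)] = find(b) (RHS first)
  let rb := pvFindB (p.length + 1) p b
  let ra := pvFindB (p.length + 1) p a
  PySem.List.pySetD p ra rb

def pvStrip : Nat → Int → Int → Int                         -- while x % d == 0: x //= d
  | 0, x, _ => x
  | fuel+1, x, d =>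
    if PySem.Int.mod x d = 0 then pvStrip fuel (PySem.Int.floordiv x d) d else x

-- while d*d <= x: if x % d == 0: union(v,d); strip; d += 1   — returns (p, final x)
def pvFactorLoop : Nat → List Int → Int → Int → Int → List Int × Int
  | 0, p, _, x, _ => (p, x)
  | fuel+1, p, v, x, d =>
    if d * d ≤ x then
      if PySem.Int.mod x d = 0 then
        let p1 := pvUnionB p v d
        let x1 := pvStrip (x.toNat + 1) x d
        pvFactorLoop fuel p1 v x1 (d+1)
      else pvFactorLoop fuel p v x (d+1)
    else (p, x)

def pvAllFindB : List Int → List (Int × Int) → Bool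
  | _, [] => true
  | p, (a, b) :: rest =>
    if pvFindB (p.length + 1) p a = pvFindB (p.length + 1) p b then pvAllFindB p rest else false

def gcdSort_alt (A : List Int) : Bool :=
  match PySem.List.max? A (fun v => v) with
  | none => false                                           -- max([]) raises ValueError: outside Pre_
  | some m =>
    let p0 : List Int := PySem.List.pyRange 0 (m+1) 1       -- p = list(range(m+1))
    let p1 := (PySem.Set.ofList A).foldl
      (fun p v =>
        let r := pvFactorLoop ((v.toNat) + 2) p v v 2       -- fuel: the loop runs < v+2 times
        if 1 < r.2 then pvUnionB r.1 v r.2 else r.1) p0     -- if x > 1: union(v, x)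
    pvAllFindB p1 (A.zip (PySem.List.sorted A (fun v => v) false))

-- ===== PRECONDITION & SPEC =====
-- Pre_ is exactly where the Python A returns: max(A) raises on [], sieve[1] raises unless max ≥ 1,
-- and an element below -(max+1) raises IndexError inside find.  Nothing A returns on is excluded.
def Pre_gcdSort (A : List Int) : Prop :=
  A ≠ [] ∧ 1 ≤ (PySem.List.max? A (fun v => v)).getD 0 ∧
    ∀ x ∈ A, -((PySem.List.max? A (fun v => v)).getD 0 + 1) ≤ x
instance (A : List Int) : Decidable (Pre_gcdSort A) := by unfold Pre_gcdSort; infer_instance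

def pvWitness_gcdSort : List Int := [10, 5, 9, 3, 15]

def Spec_gcdSort (A : List Int) (out : Bool) : Prop := out = gcdSort_alt A
instance (A : List Int) (out : Bool) : Decidable (Spec_gcdSort A out) := by unfold Spec_gcdSort; infer_instance

-- ===== CLAIM (what is proved, stated in full; the proofs are below) =====
def Claim_equal_gcdSort : Prop := ∀ (A : List Int), Dom_gcdSort A → Pre_gcdSort A → Spec_gcdSort A (gcdSort A)

-- ===== LEMMAS AND PROOFS =====

-- ===== parent-forest abstraction =====
def pvPar (p : List Int) (i : Nat) : Nat := (p.getD i 0).toNat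
def pvRoot (p : List Int) (i : Nat) : Nat := (pvPar p)^[p.length] i
abbrev pvIsRoot (p : List Int) (i : Nat) : Prop := pvPar p i = i
def pvWf (p : List Int) : Prop :=
  (∀ i, i < p.length → 0 ≤ p.getD i 0 ∧ p.getD i 0 < (p.length : Int)) ∧
  (∀ i, i < p.length → ∃ k, pvIsRoot p ((pvPar p)^[k] i))

noncomputable def pvDm (p : List Int) (i : Nat) : Nat :=
  @dite _ (∃ k, pvIsRoot p ((pvPar p)^[k] i)) (Classical.propDecidable _) (fun h => Nat.find h) (fun _ => 0)

lemma pvPar_lt (p : List Int) (hw : pvWf p) (i : Nat) (hi : i < p.length) : pvPar p i < p.length := by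
  have h := hw.1 i hi
  have : (p.getD i 0).toNat < p.length := by omega
  simpa [pvPar] using this

lemma pvIter_lt (p : List Int) (hw : pvWf p) (k : Nat) (i : Nat) (hi : i < p.length) :
    (pvPar p)^[k] i < p.length := by
  induction k generalizing i with
  | zero => simpa
  | succ k ih =>
    rw [Function.iterate_succ_apply]
    exact ih _ (pvPar_lt p hw i hi)

lemma pvDm_isRoot (p : List Int) (i : Nat) (h : ∃ k, pvIsRoot p ((pvPar p)^[k] i)) :
    pvIsRoot p ((pvPar p)^[pvDm p i] i) := by
  unfold pvDm
  rw [dif_pos h]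
  exact Nat.find_spec h
lemma pvDm_le (p : List Int) (i : Nat) (h : ∃ k, pvIsRoot p ((pvPar p)^[k] i)) (k : Nat)
    (hk : pvIsRoot p ((pvPar p)^[k] i)) : pvDm p i ≤ k := by
  unfold pvDm
  rw [dif_pos h]
  exact Nat.find_le hk
lemma pvDm_min (p : List Int) (i : Nat) (h : ∃ k, pvIsRoot p ((pvPar p)^[k] i)) (k : Nat)
    (hk : k < pvDm p i) : ¬ pvIsRoot p ((pvPar p)^[k] i) := by
  unfold pvDm at hk
  rw [dif_pos h] at hk
  exact Nat.find_min h hk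

-- once a root is reached, iterating further stays there
lemma pvIter_stable (p : List Int) (k l : Nat) (i : Nat) (hk : pvIsRoot p ((pvPar p)^[k] i))
    (hkl : k ≤ l) : (pvPar p)^[l] i = (pvPar p)^[k] i := by
  obtain ⟨d, rfl⟩ := Nat.exists_eq_add_of_le hkl
  rw [Nat.add_comm, Function.iterate_add_apply]
  exact Function.iterate_fixed hk d

-- the p-chain from i: value after pvDm p i steps is distinct for each step count (via remaining depth)
lemma pvDm_iter (p : List Int) (i : Nat) (h : ∃ k, pvIsRoot p ((pvPar p)^[k] i)) (j : Nat)
    (hj : j ≤ pvDm p i) : pvDm p ((pvPar p)^[j] i) = pvDm p i - j := by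
  have hex : ∃ k, pvIsRoot p ((pvPar p)^[k] ((pvPar p)^[j] i)) := by
    refine ⟨pvDm p i - j, ?_⟩
    rw [← Function.iterate_add_apply]
    have : pvDm p i - j + j = pvDm p i := by omega
    rw [this]; exact pvDm_isRoot p i h
  apply Nat.le_antisymm
  · apply pvDm_le p _ hex
    rw [← Function.iterate_add_apply]
    have : pvDm p i - j + j = pvDm p i := by omega
    rw [this]; exact pvDm_isRoot p i h
  · by_contra hlt
    push Not at hlt
    have h2 := pvDm_isRoot p _ hex
    rw [← Function.iterate_add_apply] at h2
    have := pvDm_min p i h (pvDm p ((pvPar p)^[j] i) + j) (by omega)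
    exact this h2

lemma pvDm_lt_len (p : List Int) (hw : pvWf p) (i : Nat) (hi : i < p.length) :
    pvDm p i < p.length := by
  have h := hw.2 i hi
  by_contra hge
  push Not at hge
  -- the nodes iter 0 i, ..., iter (dm) i are pairwise distinct (distinct pvDm values), all < len
  set d := pvDm p i with hd
  have hinj : Set.InjOn (fun j => (pvPar p)^[j] i) (Finset.range (d+1) : Finset Nat) := by
    intro a ha b hb hab
    simp only [Finset.coe_range, Set.mem_Iio] at ha hb
    have da := pvDm_iter p i h a (by omega)
    have db := pvDm_iter p i h b (by omega)
    simp only [] at hab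
    rw [hab] at da
    omega
  have hsub : Finset.image (fun j => (pvPar p)^[j] i) (Finset.range (d+1)) ⊆ Finset.range p.length := by
    intro x hx
    simp only [Finset.mem_image, Finset.mem_range] at hx ⊢
    obtain ⟨j, _, rfl⟩ := hx
    exact pvIter_lt p hw j i hi
  have hcard := Finset.card_le_card hsub
  rw [Finset.card_image_of_injOn hinj, Finset.card_range, Finset.card_range] at hcard
  omega

lemma pvRoot_isRoot (p : List Int) (hw : pvWf p) (i : Nat) (hi : i < p.length) :
    pvIsRoot p (pvRoot p i) := by
  have h := hw.2 i hi
  have hdm := pvDm_isRoot p i h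
  have := pvIter_stable p (pvDm p i) p.length i hdm (le_of_lt (pvDm_lt_len p hw i hi))
  rw [pvRoot, this]; exact hdm

lemma pvRoot_par (p : List Int) (hw : pvWf p) (i : Nat) (hi : i < p.length) :
    pvRoot p (pvPar p i) = pvRoot p i := by
  have h1 : (pvPar p)^[p.length] (pvPar p i) = (pvPar p)^[p.length + 1] i := by
    rw [Function.iterate_succ_apply]
  rw [pvRoot, pvRoot, h1]
  exact pvIter_stable p (pvDm p i) (p.length + 1) i (pvDm_isRoot p i (hw.2 i hi))
      (by have := pvDm_lt_len p hw i hi; omega) |>.trans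
    (pvIter_stable p (pvDm p i) p.length i (pvDm_isRoot p i (hw.2 i hi))
      (le_of_lt (pvDm_lt_len p hw i hi))).symm

lemma pvRoot_of_isRoot (p : List Int) (i : Nat) (hr : pvIsRoot p i) : pvRoot p i = i :=
  Function.iterate_fixed hr p.length

lemma pvRoot_lt (p : List Int) (hw : pvWf p) (i : Nat) (hi : i < p.length) :
    pvRoot p i < p.length := pvIter_lt p hw p.length i hi

lemma pvPar_set (p : List Int) (i w j : Nat) (hi : i < p.length) :
    pvPar (p.set i (w : Int)) j = if j = i then w else pvPar p j := by
  by_cases hj : j = i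
  · subst hj
    simp [pvPar, List.getD, hi]
  · simp [pvPar, List.getD, List.getElem?_set_ne (fun h => hj h.symm), hj]

-- the crux: setting slot i to a root w (with i itself a root, or w the root of i)
-- redirects exactly the class of i onto w and preserves well-formedness
lemma pvSet_root_case (p : List Int) (hw : pvWf p) (i w : Nat) (hi : i < p.length)
    (hwr : pvIsRoot p w) (hcase : pvIsRoot p i ∨ w = pvRoot p i) (j : Nat) (hj : j < p.length)
    (hr : pvIsRoot p j) :
    ∃ k, k ≤ pvDm p j + 1 ∧ pvIsRoot (p.set i (w : Int)) ((pvPar (p.set i (w : Int)))^[k] j) ∧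
      (pvPar (p.set i (w : Int)))^[k] j = (if pvRoot p j = pvRoot p i then w else pvRoot p j) := by
  by_cases hji : j = i
  · subst hji
    have hfml : (if pvRoot p j = pvRoot p j then w else pvRoot p j) = w := if_pos rfl
    rw [pvRoot_of_isRoot p j hr] at hfml ⊢
    by_cases hwj : w = j
    · refine ⟨0, by omega, ?_, ?_⟩
      · simp only [Function.iterate_zero, id, pvIsRoot]
        rw [pvPar_set p j w j hj, if_pos rfl, hwj]
      · simp [hwj]
    · have hpw : pvPar (p.set j (w:Int)) w = w := by
        rw [pvPar_set p j w w hj, if_neg hwj]; exact hwr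
      refine ⟨1, by omega, ?_, ?_⟩
      · simp only [Function.iterate_one, pvIsRoot]
        rw [pvPar_set p j w j hj, if_pos rfl, hpw]
      · simp only [Function.iterate_one]
        rw [pvPar_set p j w j hj, if_pos rfl]
        simp
  · have hpar' : pvPar (p.set i (w:Int)) j = j := by
      rw [pvPar_set p i w j hi, if_neg hji]; exact hr
    refine ⟨0, by omega, by simpa [pvIsRoot] using hpar', ?_⟩
    simp only [Function.iterate_zero, id]
    rw [pvRoot_of_isRoot p j hr]
    rcases hcase with hri | hwri
    · rw [pvRoot_of_isRoot p i hri, if_neg hji]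
    · by_cases hc : j = pvRoot p i
      · rw [if_pos hc, hwri, ← hc]
      · rw [if_neg hc]

lemma pvSet_aux (p : List Int) (hw : pvWf p) (i w : Nat) (hi : i < p.length) (hwl : w < p.length)
    (hwr : pvIsRoot p w) (hcase : pvIsRoot p i ∨ w = pvRoot p i) :
    ∀ N j, j < p.length → pvDm p j ≤ N →
      ∃ k, k ≤ pvDm p j + 1 ∧ pvIsRoot (p.set i (w : Int)) ((pvPar (p.set i (w : Int)))^[k] j) ∧
        (pvPar (p.set i (w : Int)))^[k] j = (if pvRoot p j = pvRoot p i then w else pvRoot p j) := by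
  intro N
  induction N with
  | zero =>
    intro j hj hdm
    have hr : pvIsRoot p j := by
      have := pvDm_isRoot p j (hw.2 j hj)
      rw [Nat.le_zero.mp hdm] at this
      simpa using this
    exact pvSet_root_case p hw i w hi hwr hcase j hj hr
  | succ N ih =>
    intro j hj hdm
    by_cases hr : pvIsRoot p j
    · exact pvSet_root_case p hw i w hi hwr hcase j hj hr
    · by_cases hji : j = i
      · subst hji
        rcases hcase with hri | hwri
        · exact absurd hri hr
        · have hwj : w ≠ j := by
            intro hwj
            apply hr
            have hir : pvIsRoot p (pvRoot p j) := pvRoot_isRoot p hw j hj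
            rw [hwj] at hwri
            rw [← hwri] at hir
            exact hir
          have hpw : pvPar (p.set j (w:Int)) w = w := by
            rw [pvPar_set p j w w hj, if_neg hwj]; exact hwr
          refine ⟨1, by omega, ?_, ?_⟩
          · simp only [Function.iterate_one, pvIsRoot]
            rw [pvPar_set p j w j hj, if_pos rfl, hpw]
          · simp only [Function.iterate_one]
            rw [pvPar_set p j w j hj, if_pos rfl]
            simp
      · have hj' : pvPar p j < p.length := pvPar_lt p hw j hj
        have hdm1 : 1 ≤ pvDm p j := by
          by_contra h0
          exact hr (by
            have := pvDm_isRoot p j (hw.2 j hj)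
            have hz : pvDm p j = 0 := by omega
            rw [hz] at this; simpa using this)
        have hdmstep : pvDm p (pvPar p j) = pvDm p j - 1 := by
          have := pvDm_iter p j (hw.2 j hj) 1 hdm1
          simpa using this
        obtain ⟨k, hk, hkr, hkv⟩ := ih (pvPar p j) hj' (by omega)
        have hstep : pvPar (p.set i (w:Int)) j = pvPar p j := by
          rw [pvPar_set p i w j hi, if_neg hji]
        refine ⟨k + 1, by omega, ?_, ?_⟩
        · rw [Function.iterate_succ_apply, hstep]; exact hkr
        · rw [Function.iterate_succ_apply, hstep, hkv, pvRoot_par p hw j hj]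

lemma pvSet_wf (p : List Int) (hw : pvWf p) (i w : Nat) (hi : i < p.length) (hwl : w < p.length)
    (hwr : pvIsRoot p w) (hcase : pvIsRoot p i ∨ w = pvRoot p i) :
    pvWf (p.set i (w : Int)) := by
  constructor
  · intro j hj
    rw [List.length_set] at hj
    by_cases hji : j = i
    · subst hji
      simp [List.getD, hj]
      omega
    · simpa [List.getD, List.getElem?_set_ne (fun h => hji h.symm), List.length_set] using hw.1 j hj
  · intro j hj
    rw [List.length_set] at hj
    obtain ⟨k, _, hkr, _⟩ := pvSet_aux p hw i w hi hwl hwr hcase (pvDm p j) j hj le_rfl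
    exact ⟨k, hkr⟩

lemma pvSet_root (p : List Int) (hw : pvWf p) (i w : Nat) (hi : i < p.length) (hwl : w < p.length)
    (hwr : pvIsRoot p w) (hcase : pvIsRoot p i ∨ w = pvRoot p i) (j : Nat) (hj : j < p.length) :
    pvRoot (p.set i (w : Int)) j = (if pvRoot p j = pvRoot p i then w else pvRoot p j) := by
  obtain ⟨k, hk, hkr, hkv⟩ := pvSet_aux p hw i w hi hwl hwr hcase (pvDm p j) j hj le_rfl
  have hkl : k ≤ (p.set i (w:Int)).length := by
    rw [List.length_set]
    have := pvDm_lt_len p hw j hj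
    omega
  rw [pvRoot, pvIter_stable _ k _ j hkr hkl, hkv]


-- ===== Python index normalisation =====
def pvNrm (len : Nat) (u : Int) : Nat := if u < 0 then (u + len).toNat else u.toNat

lemma pvNrm_lt (len : Nat) (u : Int) (h1 : -(len:Int) ≤ u) (h2 : u < (len:Int)) :
    pvNrm len u < len := by
  unfold pvNrm; split_ifs <;> omega

lemma pvNrm_natCast (len : Nat) (k : Nat) : pvNrm len (k : Int) = k := by
  simp [pvNrm]

lemma pvIdx?_nrm (n : Nat) (u : Int) (h1 : -(n:Int) ≤ u) (h2 : u < (n:Int)) :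
    PySem.List.pyIdx? n u = some (pvNrm n u) := by
  unfold PySem.List.pyIdx? pvNrm
  by_cases h : 0 ≤ u
  · rw [if_pos h, if_pos (by omega), if_neg (by omega)]
  · rw [if_neg h, if_pos (by omega), if_pos (by omega)]
    congr 1
    omega

lemma pvGetD_nrm (p : List Int) (u : Int) (h1 : -(p.length:Int) ≤ u) (h2 : u < (p.length:Int)) :
    PySem.List.pyGetD p u 0 = p.getD (pvNrm p.length u) 0 := by
  have hlt := pvNrm_lt p.length u h1 h2
  simp [PySem.List.pyGetD, PySem.List.pyGet?, pvIdx?_nrm p.length u h1 h2, List.getD,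
    List.getElem?_eq_getElem hlt]

lemma pvSetD_nrm (p : List Int) (u : Int) (v : Int) (h1 : -(p.length:Int) ≤ u)
    (h2 : u < (p.length:Int)) :
    PySem.List.pySetD p u v = p.set (pvNrm p.length u) v := by
  simp [PySem.List.pySetD, PySem.List.pySet?, pvIdx?_nrm p.length u h1 h2]

-- pvPar expressed through pyGetD for in-range u, under wf
lemma pvGetD_par (p : List Int) (hw : pvWf p) (j : Nat) (hj : j < p.length) :
    p.getD j 0 = ((pvPar p j : Nat) : Int) := by
  have := (hw.1 j hj).1
  simp only [pvPar, List.getD] at *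
  omega


-- ===== find / union specifications =====
lemma pvFindB_spec : ∀ (f : Nat) (p : List Int) (u : Int), pvWf p →
    -(p.length:Int) ≤ u → u < (p.length:Int) →
    pvDm p (pvNrm p.length u) + (if 0 ≤ u then 1 else 2) ≤ f →
    pvFindB f p u = ((pvRoot p (pvNrm p.length u) : Nat) : Int) := by
  intro f
  induction f with
  | zero => intro p u hw h1 h2 hf; split_ifs at hf <;> omega
  | succ f ih =>
    intro p u hw h1 h2 hf
    have hn := pvNrm_lt p.length u h1 h2
    have hpu : PySem.List.pyGetD p u 0 = ((pvPar p (pvNrm p.length u) : Nat) : Int) := by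
      rw [pvGetD_nrm p u h1 h2, ← pvGetD_par p hw _ hn]
    simp only [pvFindB, hpu]
    by_cases heq : ((pvPar p (pvNrm p.length u) : Nat) : Int) = u
    · rw [if_neg (by simpa using heq)]
      have hu0 : 0 ≤ u := by
        by_contra h
        omega
      have hroot : pvIsRoot p (pvNrm p.length u) := by
        have : pvNrm p.length u = u.toNat := by simp [pvNrm]; omega
        unfold pvIsRoot
        omega
      rw [pvRoot_of_isRoot p _ hroot]
      simp [pvNrm]
      omega
    · rw [if_pos (by simpa using heq)]
      set i := pvNrm p.length u with hidef
      have hpar_lt : pvPar p i < p.length := pvPar_lt p hw i hn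
      have hnrmcast : pvNrm p.length ((pvPar p i : Nat) : Int) = pvPar p i := pvNrm_natCast _ _
      by_cases hroot : pvIsRoot p i
      · -- only possible when u < 0; one extra step to the (root) node itself
        have hu0 : ¬ 0 ≤ u := by
          intro h
          apply heq
          have : i = u.toNat := by simp [hidef, pvNrm]; omega
          rw [this] at hroot ⊢
          unfold pvIsRoot at hroot
          omega
        have hdm0 : pvDm p i = 0 := Nat.le_zero.mp (pvDm_le p i (hw.2 i hn) 0 (by simpa using hroot))
        have := ih p ((pvPar p i : Nat) : Int) hw (by omega) (by exact_mod_cast hpar_lt)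
          (by rw [hnrmcast, hroot, hdm0] at *; simp; split_ifs at hf ⊢ <;> omega)
        rw [this, hnrmcast, hroot, pvRoot_of_isRoot p i hroot]
      · have hdm1 : 1 ≤ pvDm p i := by
          by_contra h0
          have := pvDm_isRoot p i (hw.2 i hn)
          have hz : pvDm p i = 0 := by omega
          rw [hz] at this
          exact hroot (by simpa using this)
        have hdmstep : pvDm p (pvPar p i) = pvDm p i - 1 := by
          have := pvDm_iter p i (hw.2 i hn) 1 hdm1
          simpa using this
        have := ih p ((pvPar p i : Nat) : Int) hw (by omega) (by exact_mod_cast hpar_lt)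
          (by rw [hnrmcast, hdmstep]; split_ifs at hf ⊢ <;> omega)
        rw [this, hnrmcast, pvRoot_par p hw i hn]


lemma pvFindA_spec : ∀ (f : Nat) (p : List Int) (u : Int), pvWf p →
    -(p.length:Int) ≤ u → u < (p.length:Int) →
    pvDm p (pvNrm p.length u) + (if 0 ≤ u then 1 else 2) ≤ f →
    (pvFindA f p u).1.length = p.length ∧ pvWf (pvFindA f p u).1 ∧
      (pvFindA f p u).2 = ((pvRoot p (pvNrm p.length u) : Nat) : Int) ∧
      (∀ j, j < p.length → pvRoot (pvFindA f p u).1 j = pvRoot p j) ∧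
      (∀ j, j < p.length → pvIsRoot p j → pvIsRoot (pvFindA f p u).1 j) := by
  intro f
  induction f with
  | zero => intro p u hw h1 h2 hf; split_ifs at hf <;> omega
  | succ f ih =>
    intro p u hw h1 h2 hf
    have hn := pvNrm_lt p.length u h1 h2
    have hpu : PySem.List.pyGetD p u 0 = ((pvPar p (pvNrm p.length u) : Nat) : Int) := by
      rw [pvGetD_nrm p u h1 h2, ← pvGetD_par p hw _ hn]
    simp only [pvFindA, hpu]
    by_cases heq : ((pvPar p (pvNrm p.length u) : Nat) : Int) = u
    · rw [if_neg (by simpa using heq)]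
      have hu0 : 0 ≤ u := by omega
      have hroot : pvIsRoot p (pvNrm p.length u) := by
        have hnu : pvNrm p.length u = u.toNat := by simp [pvNrm]; omega
        unfold pvIsRoot
        omega
      refine ⟨rfl, hw, ?_, fun j _ => rfl, fun j _ h => h⟩
      rw [pvRoot_of_isRoot p _ hroot]
      show ((pvPar p (pvNrm p.length u) : Nat) : Int) = _
      exact_mod_cast hroot
    · rw [if_pos (by simpa using heq)]
      set i := pvNrm p.length u with hidef
      have hpar_lt : pvPar p i < p.length := pvPar_lt p hw i hn
      have hnrmcast : pvNrm p.length ((pvPar p i : Nat) : Int) = pvPar p i := pvNrm_natCast _ _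
      set R := pvRoot p i with hRdef
      have hRlt : R < p.length := pvRoot_lt p hw i hn
      have hRroot : pvIsRoot p R := pvRoot_isRoot p hw i hn
      -- the recursive call returns the root of i (whether or not i is already a root)
      have hrec : (pvFindA f p ((pvPar p i : Nat) : Int)).1.length = p.length ∧
          pvWf (pvFindA f p ((pvPar p i : Nat) : Int)).1 ∧
          (pvFindA f p ((pvPar p i : Nat) : Int)).2 = ((R : Nat) : Int) ∧
          (∀ j, j < p.length → pvRoot (pvFindA f p ((pvPar p i : Nat) : Int)).1 j = pvRoot p j) ∧
          (∀ j, j < p.length → pvIsRoot p j → pvIsRoot (pvFindA f p ((pvPar p i : Nat) : Int)).1 j) := by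
        by_cases hroot : pvIsRoot p i
        · have hu0 : ¬ 0 ≤ u := by
            intro h
            apply heq
            have : i = u.toNat := by simp [hidef, pvNrm]; omega
            rw [this] at hroot ⊢
            unfold pvIsRoot at hroot
            omega
          have hdm0 : pvDm p i = 0 := Nat.le_zero.mp (pvDm_le p i (hw.2 i hn) 0 (by simpa using hroot))
          have h := ih p ((pvPar p i : Nat) : Int) hw (by omega) (by exact_mod_cast hpar_lt)
            (by rw [hnrmcast, hroot, hdm0]; split_ifs at hf ⊢ <;> omega)
          rw [hnrmcast, pvRoot_par p hw i hn] at h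
          exact h
        · have hdm1 : 1 ≤ pvDm p i := by
            by_contra h0
            have := pvDm_isRoot p i (hw.2 i hn)
            have hz : pvDm p i = 0 := by omega
            rw [hz] at this
            exact hroot (by simpa using this)
          have hdmstep : pvDm p (pvPar p i) = pvDm p i - 1 := by
            have := pvDm_iter p i (hw.2 i hn) 1 hdm1
            simpa using this
          have h := ih p ((pvPar p i : Nat) : Int) hw (by omega) (by exact_mod_cast hpar_lt)
            (by rw [hnrmcast, hdmstep]; split_ifs at hf ⊢ <;> omega)
          rw [hnrmcast, pvRoot_par p hw i hn] at h
          exact h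
      obtain ⟨hlen1, hw1, hval1, hpres1, hkeep1⟩ := hrec
      set p1 := (pvFindA f p ((pvPar p i : Nat) : Int)).1 with hp1
      have hset : PySem.List.pySetD p1 u ((R : Nat) : Int) = p1.set i ((R : Nat) : Int) := by
        rw [pvSetD_nrm p1 u _ (by rw [hlen1]; exact h1) (by rw [hlen1]; exact h2)]
        congr 1
        rw [hidef, hlen1]
      have hiR1 : pvIsRoot p1 R := hkeep1 R hRlt hRroot
      have hcase : pvIsRoot p1 i ∨ R = pvRoot p1 i := Or.inr (by rw [hpres1 i hn])
      have hin1 : i < p1.length := by rw [hlen1]; exact hn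
      have hRl1 : R < p1.length := by rw [hlen1]; exact hRlt
      have hwf2 := pvSet_wf p1 hw1 i R hin1 hRl1 hiR1 hcase
      have hroots2 := pvSet_root p1 hw1 i R hin1 hRl1 hiR1 hcase
      have hroot1i : pvRoot p1 i = R := by rw [hpres1 i hn]
      simp only [hval1, hset]
      refine ⟨by rw [List.length_set, hlen1], hwf2, ?_, ?_, ?_⟩
      · -- returned value: p2[u] which was just set to R
        rw [pvGetD_nrm _ u (by rw [List.length_set, hlen1]; exact h1)
              (by rw [List.length_set, hlen1]; exact h2)]
        have : pvNrm (p1.set i ((R:Nat):Int)).length u = i := by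
          rw [List.length_set, hlen1, hidef]
        rw [this, List.getD, List.getElem?_set_self (by exact hin1)]
        simp
      · intro j hj
        have hj1 : j < p1.length := by rw [hlen1]; exact hj
        rw [hroots2 j hj1, hpres1 j hj, hroot1i]
        by_cases hc : pvRoot p j = R
        · rw [if_pos hc, hc]
        · rw [if_neg hc]
      · intro j hj hr
        have hj1 : j < p1.length := by rw [hlen1]; exact hj
        have hr1 : pvIsRoot p1 j := hkeep1 j hj hr
        unfold pvIsRoot
        rw [pvPar_set p1 i R j hin1]
        by_cases hji : j = i
        · rw [if_pos hji]
          -- then i is a root of p1, so R = root p1 i = i = j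
          rw [hji] at hr1
          have : pvRoot p1 i = i := pvRoot_of_isRoot p1 i hr1
          rw [hroot1i] at this
          omega
        · rw [if_neg hji]; exact hr1


lemma pvFuel (p : List Int) (hw : pvWf p) (u : Int) (h1 : -(p.length:Int) ≤ u)
    (h2 : u < (p.length:Int)) :
    pvDm p (pvNrm p.length u) + (if 0 ≤ u then 1 else 2) ≤ p.length + 1 := by
  have := pvDm_lt_len p hw _ (pvNrm_lt p.length u h1 h2)
  split_ifs <;> omega

lemma pvUnionA_spec (p : List Int) (hw : pvWf p) (x y : Int)
    (hx1 : -(p.length:Int) ≤ x) (hx2 : x < (p.length:Int))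
    (hy1 : -(p.length:Int) ≤ y) (hy2 : y < (p.length:Int)) :
    (pvUnionA p x y).length = p.length ∧ pvWf (pvUnionA p x y) ∧
      ∀ j, j < p.length → pvRoot (pvUnionA p x y) j =
        (if pvRoot p j = pvRoot p (pvNrm p.length x) then pvRoot p (pvNrm p.length y)
         else pvRoot p j) := by
  set RX := pvRoot p (pvNrm p.length x) with hRX
  set RY := pvRoot p (pvNrm p.length y) with hRY
  have hnx := pvNrm_lt p.length x hx1 hx2
  have hny := pvNrm_lt p.length y hy1 hy2
  have hRXl : RX < p.length := pvRoot_lt p hw _ hnx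
  have hRYl : RY < p.length := pvRoot_lt p hw _ hny
  have hRXr : pvIsRoot p RX := pvRoot_isRoot p hw _ hnx
  have hRYr : pvIsRoot p RY := pvRoot_isRoot p hw _ hny
  obtain ⟨hl1, hw1, hv1, hp1, hk1⟩ := pvFindA_spec (p.length + 1) p y hw hy1 hy2 (pvFuel p hw y hy1 hy2)
  set p1 := (pvFindA (p.length + 1) p y).1 with hp1d
  obtain ⟨hl2, hw2, hv2, hp2, hk2⟩ := pvFindA_spec (p1.length + 1) p1 x hw1
    (by rw [hl1]; exact hx1) (by rw [hl1]; exact hx2)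
    (pvFuel p1 hw1 x (by rw [hl1]; exact hx1) (by rw [hl1]; exact hx2))
  set p2 := (pvFindA (p1.length + 1) p1 x).1 with hp2d
  have hl2' : p2.length = p.length := by rw [hl2, hl1]
  have hnrm1 : pvNrm p1.length x = pvNrm p.length x := by rw [hl1]
  have hv2' : (pvFindA (p1.length + 1) p1 x).2 = ((RX : Nat) : Int) := by
    rw [hv2, hnrm1, hp1 _ hnx]
  have hRXr2 : pvIsRoot p2 RX := hk2 RX (by rw [hl1]; exact hRXl) (hk1 RX hRXl hRXr)
  have hRYr2 : pvIsRoot p2 RY := hk2 RY (by rw [hl1]; exact hRYl) (hk1 RY hRYl hRYr)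
  have hset : pvUnionA p x y = p2.set RX ((RY : Nat) : Int) := by
    show PySem.List.pySetD p2 (pvFindA (p1.length + 1) p1 x).2 (pvFindA (p.length + 1) p y).2
      = p2.set RX ((RY : Nat) : Int)
    rw [hv1, hv2', pvSetD_nrm p2 _ _ (by omega) (by rw [hl2']; exact_mod_cast hRXl),
      pvNrm_natCast]
  have hcase : pvIsRoot p2 RX ∨ RY = pvRoot p2 RX := Or.inl hRXr2
  have hwf3 := pvSet_wf p2 hw2 RX RY (by rw [hl2']; exact hRXl) (by rw [hl2']; exact hRYl)
    hRYr2 hcase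
  have hroots3 := pvSet_root p2 hw2 RX RY (by rw [hl2']; exact hRXl) (by rw [hl2']; exact hRYl)
    hRYr2 hcase
  rw [hset]
  refine ⟨by rw [List.length_set, hl2'], hwf3, ?_⟩
  intro j hj
  have hj2 : j < p2.length := by rw [hl2']; exact hj
  have hpp : ∀ i, i < p.length → pvRoot p2 i = pvRoot p i := by
    intro i hi
    rw [hp2 i (by rw [hl1]; exact hi), hp1 i hi]
  rw [hroots3 j hj2, hpp j hj, pvRoot_of_isRoot p2 RX hRXr2]

lemma pvUnionB_spec (p : List Int) (hw : pvWf p) (x y : Int)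
    (hx1 : -(p.length:Int) ≤ x) (hx2 : x < (p.length:Int))
    (hy1 : -(p.length:Int) ≤ y) (hy2 : y < (p.length:Int)) :
    (pvUnionB p x y).length = p.length ∧ pvWf (pvUnionB p x y) ∧
      ∀ j, j < p.length → pvRoot (pvUnionB p x y) j =
        (if pvRoot p j = pvRoot p (pvNrm p.length x) then pvRoot p (pvNrm p.length y)
         else pvRoot p j) := by
  set RX := pvRoot p (pvNrm p.length x) with hRX
  set RY := pvRoot p (pvNrm p.length y) with hRY
  have hnx := pvNrm_lt p.length x hx1 hx2
  have hny := pvNrm_lt p.length y hy1 hy2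
  have hRXl : RX < p.length := pvRoot_lt p hw _ hnx
  have hRYl : RY < p.length := pvRoot_lt p hw _ hny
  have hRXr : pvIsRoot p RX := pvRoot_isRoot p hw _ hnx
  have hRYr : pvIsRoot p RY := pvRoot_isRoot p hw _ hny
  have hfx := pvFindB_spec (p.length + 1) p x hw hx1 hx2 (pvFuel p hw x hx1 hx2)
  have hfy := pvFindB_spec (p.length + 1) p y hw hy1 hy2 (pvFuel p hw y hy1 hy2)
  have hset : pvUnionB p x y = p.set RX ((RY : Nat) : Int) := by
    show PySem.List.pySetD p (pvFindB (p.length + 1) p x) (pvFindB (p.length + 1) p y)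
      = p.set RX ((RY : Nat) : Int)
    rw [hfx, hfy, pvSetD_nrm p _ _ (by omega) (by exact_mod_cast hRXl), pvNrm_natCast]
  have hcase : pvIsRoot p RX ∨ RY = pvRoot p RX := Or.inl hRXr
  have hwf' := pvSet_wf p hw RX RY hRXl hRYl hRYr hcase
  have hroots' := pvSet_root p hw RX RY hRXl hRYl hRYr hcase
  rw [hset]
  refine ⟨by rw [List.length_set], hwf', ?_⟩
  intro j hj
  rw [hroots' j hj, pvRoot_of_isRoot p RX hRXr]

lemma pvAllFind_eq : ∀ (pairs : List (Int × Int)) (pA pB : List Int), pvWf pA → pvWf pB →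
    pA.length = pB.length →
    (∀ a b : Nat, a < pA.length → b < pA.length →
      (pvRoot pA a = pvRoot pA b ↔ pvRoot pB a = pvRoot pB b)) →
    (∀ ab ∈ pairs, -(pA.length:Int) ≤ ab.1 ∧ ab.1 < (pA.length:Int) ∧
      -(pA.length:Int) ≤ ab.2 ∧ ab.2 < (pA.length:Int)) →
    pvAllFindA pA pairs = pvAllFindB pB pairs
  | [], pA, pB, _, _, _, _, _ => rfl
  | (a, b) :: rest, pA, pB, hwA, hwB, hlen, hpart, hmem => by
    obtain ⟨ha1, ha2, hb1, hb2⟩ := hmem (a, b) (List.mem_cons_self)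
    obtain ⟨hl1, hw1, hv1, hp1, _⟩ := pvFindA_spec (pA.length + 1) pA a hwA ha1 ha2
      (pvFuel pA hwA a ha1 ha2)
    set q1 := (pvFindA (pA.length + 1) pA a).1 with hq1
    obtain ⟨hl2, hw2, hv2, hp2, _⟩ := pvFindA_spec (q1.length + 1) q1 b hw1
      (by rw [hl1]; exact hb1) (by rw [hl1]; exact hb2)
      (pvFuel q1 hw1 b (by rw [hl1]; exact hb1) (by rw [hl1]; exact hb2))
    set q2 := (pvFindA (q1.length + 1) q1 b).1 with hq2
    have hl2' : q2.length = pA.length := by rw [hl2, hl1]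
    have hna := pvNrm_lt pA.length a ha1 ha2
    have hnb := pvNrm_lt pA.length b hb1 hb2
    have hfa := pvFindB_spec (pB.length + 1) pB a hwB (by rw [← hlen]; exact ha1)
      (by rw [← hlen]; exact ha2)
      (pvFuel pB hwB a (by rw [← hlen]; exact ha1) (by rw [← hlen]; exact ha2))
    have hfb := pvFindB_spec (pB.length + 1) pB b hwB (by rw [← hlen]; exact hb1)
      (by rw [← hlen]; exact hb2)
      (pvFuel pB hwB b (by rw [← hlen]; exact hb1) (by rw [← hlen]; exact hb2))
    have hv2' : (pvFindA (q1.length + 1) q1 b).2 = ((pvRoot pA (pvNrm pA.length b) : Nat) : Int) := by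
      rw [hv2, hl1, hp1 _ hnb]
    have hcond : ((pvFindA (pA.length + 1) pA a).2 = (pvFindA (q1.length + 1) q1 b).2)
        ↔ (pvFindB (pB.length + 1) pB a = pvFindB (pB.length + 1) pB b) := by
      rw [hv1, hv2', hfa, hfb, ← hlen]
      constructor
      · intro h
        have h' : pvRoot pA (pvNrm pA.length a) = pvRoot pA (pvNrm pA.length b) := by
          exact_mod_cast h
        have := (hpart _ _ hna hnb).mp h'
        exact_mod_cast this
      · intro h
        have h' : pvRoot pB (pvNrm pA.length a) = pvRoot pB (pvNrm pA.length b) := by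
          exact_mod_cast h
        have := (hpart _ _ hna hnb).mpr h'
        exact_mod_cast this
    show (if (pvFindA (pA.length + 1) pA a).2 = (pvFindA (q1.length + 1) q1 b).2
        then pvAllFindA q2 rest else false)
      = (if pvFindB (pB.length + 1) pB a = pvFindB (pB.length + 1) pB b
        then pvAllFindB pB rest else false)
    by_cases hc : (pvFindA (pA.length + 1) pA a).2 = (pvFindA (q1.length + 1) q1 b).2
    · rw [if_pos hc, if_pos (hcond.mp hc)]
      apply pvAllFind_eq rest q2 pB hw2 hwB (by rw [hl2'];  exact hlen)
      · intro i j hi hj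
        rw [hl2'] at hi hj
        rw [hp2 i (by rw [hl1]; exact hi), hp2 j (by rw [hl1]; exact hj),
          hp1 i hi, hp1 j hj]
        exact hpart i j hi hj
      · intro ab hab
        rw [hl2']
        exact hmem ab (List.mem_cons_of_mem _ hab)
    · rw [if_neg hc, if_neg (fun h => hc (hcond.mpr h))]


-- ===== equivalence-closure bookkeeping =====
lemma pvEgen_empty (a b : Nat) : Relation.EqvGen (fun _ _ => False) a b ↔ a = b := by
  constructor
  · intro h
    induction h with
    | rel _ _ h => exact h.elim
    | refl _ => rfl
    | symm _ _ _ ih => exact ih.symm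
    | trans _ _ _ _ _ ih1 ih2 => exact ih1.trans ih2
  · rintro rfl
    exact Relation.EqvGen.refl a

lemma pvEgen_iff (r s : Nat → Nat → Prop) (h : ∀ a b, r a b ↔ s a b) (a b : Nat) :
    Relation.EqvGen r a b ↔ Relation.EqvGen s a b :=
  ⟨Relation.EqvGen.mono (fun a b hr => (h a b).mp hr),
   Relation.EqvGen.mono (fun a b hs => (h a b).mpr hs)⟩

lemma pvEgen_insert (r : Nat → Nat → Prop) (x y a b : Nat) :
    Relation.EqvGen (fun u v => r u v ∨ (u = x ∧ v = y)) a b ↔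
      Relation.EqvGen r a b ∨ (Relation.EqvGen r a x ∧ Relation.EqvGen r y b) ∨
        (Relation.EqvGen r a y ∧ Relation.EqvGen r x b) := by
  constructor
  · intro h
    induction h with
    | rel u v huv =>
      rcases huv with h | ⟨rfl, rfl⟩
      · exact Or.inl (Relation.EqvGen.rel _ _ h)
      · exact Or.inr (Or.inl ⟨Relation.EqvGen.refl _, Relation.EqvGen.refl _⟩)
    | refl u => exact Or.inl (Relation.EqvGen.refl u)
    | symm u v _ ih =>
      rcases ih with h | ⟨h1, h2⟩ | ⟨h1, h2⟩
      · exact Or.inl (Relation.EqvGen.symm _ _ h)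
      · exact Or.inr (Or.inr ⟨Relation.EqvGen.symm _ _ h2, Relation.EqvGen.symm _ _ h1⟩)
      · exact Or.inr (Or.inl ⟨Relation.EqvGen.symm _ _ h2, Relation.EqvGen.symm _ _ h1⟩)
    | trans u v w _ _ ih1 ih2 =>
      rcases ih1 with h1 | ⟨p1, q1⟩ | ⟨p1, q1⟩ <;> rcases ih2 with h2 | ⟨p2, q2⟩ | ⟨p2, q2⟩
      · exact Or.inl (Relation.EqvGen.trans _ _ _ h1 h2)
      · exact Or.inr (Or.inl ⟨Relation.EqvGen.trans _ _ _ h1 p2, q2⟩)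
      · exact Or.inr (Or.inr ⟨Relation.EqvGen.trans _ _ _ h1 p2, q2⟩)
      · exact Or.inr (Or.inl ⟨p1, Relation.EqvGen.trans _ _ _ q1 h2⟩)
      · exact Or.inr (Or.inl ⟨p1, q2⟩)
      · exact Or.inl (Relation.EqvGen.trans _ _ _ p1 q2)
      · exact Or.inr (Or.inr ⟨p1, Relation.EqvGen.trans _ _ _ q1 h2⟩)
      · exact Or.inl (Relation.EqvGen.trans _ _ _ p1 q2)
      · exact Or.inr (Or.inr ⟨p1, q2⟩)
  · intro h
    have hmono : ∀ c d, Relation.EqvGen r c d →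
        Relation.EqvGen (fun u v => r u v ∨ (u = x ∧ v = y)) c d :=
      fun c d => Relation.EqvGen.mono (fun a b hr => Or.inl hr)
    have hxy : Relation.EqvGen (fun u v => r u v ∨ (u = x ∧ v = y)) x y :=
      Relation.EqvGen.rel _ _ (Or.inr ⟨rfl, rfl⟩)
    rcases h with h | ⟨h1, h2⟩ | ⟨h1, h2⟩
    · exact hmono _ _ h
    · exact Relation.EqvGen.trans _ _ _ (Relation.EqvGen.trans _ _ _ (hmono _ _ h1) hxy) (hmono _ _ h2)
    · exact Relation.EqvGen.trans _ _ _
        (Relation.EqvGen.trans _ _ _ (hmono _ _ h1) (Relation.EqvGen.symm _ _ hxy)) (hmono _ _ h2)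

lemma pvMerge (ra rb RX RY : Nat) :
    ((if ra = RX then RY else ra) = (if rb = RX then RY else rb)) ↔
      (ra = rb ∨ (ra = RX ∧ RY = rb) ∨ (ra = RY ∧ RX = rb)) := by
  split_ifs <;> omega

-- the parent list p represents exactly the closure of the edge relation r
def pvTracks (p : List Int) (r : Nat → Nat → Prop) : Prop :=
  ∀ a b : Nat, a < p.length → b < p.length →
    (pvRoot p a = pvRoot p b ↔ Relation.EqvGen r a b)

lemma pvTracks_unionA (p : List Int) (hw : pvWf p) (r : Nat → Nat → Prop)
    (ht : pvTracks p r) (x y : Int)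
    (hx1 : -(p.length:Int) ≤ x) (hx2 : x < (p.length:Int))
    (hy1 : -(p.length:Int) ≤ y) (hy2 : y < (p.length:Int)) :
    pvTracks (pvUnionA p x y)
      (fun u v => r u v ∨ (u = pvNrm p.length x ∧ v = pvNrm p.length y)) := by
  obtain ⟨hlen, hwf, hroots⟩ := pvUnionA_spec p hw x y hx1 hx2 hy1 hy2
  intro a b ha hb
  rw [hlen] at ha hb
  rw [hroots a ha, hroots b hb, pvMerge, pvEgen_insert]
  have hnx := pvNrm_lt p.length x hx1 hx2
  have hny := pvNrm_lt p.length y hy1 hy2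
  rw [ht a b ha hb, ht a _ ha hnx, ht _ b hny hb, ht a _ ha hny, ht _ b hnx hb]


lemma pvTracks_unionB (p : List Int) (hw : pvWf p) (r : Nat → Nat → Prop)
    (ht : pvTracks p r) (x y : Int)
    (hx1 : -(p.length:Int) ≤ x) (hx2 : x < (p.length:Int))
    (hy1 : -(p.length:Int) ≤ y) (hy2 : y < (p.length:Int)) :
    pvTracks (pvUnionB p x y)
      (fun u v => r u v ∨ (u = pvNrm p.length x ∧ v = pvNrm p.length y)) := by
  obtain ⟨hlen, hwf, hroots⟩ := pvUnionB_spec p hw x y hx1 hx2 hy1 hy2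
  intro a b ha hb
  rw [hlen] at ha hb
  rw [hroots a ha, hroots b hb, pvMerge, pvEgen_insert]
  have hnx := pvNrm_lt p.length x hx1 hx2
  have hny := pvNrm_lt p.length y hy1 hy2
  rw [ht a b ha hb, ht a _ ha hnx, ht _ b hny hb, ht a _ ha hny, ht _ b hnx hb]

-- ===== the initial parent list list(range(m+1)) =====
lemma pvP0_getD (m : Int) (j : Nat) (hj : j < (PySem.List.pyRange 0 (m+1) 1).length) :
    (PySem.List.pyRange 0 (m+1) 1).getD j 0 = (j : Int) := by
  rw [List.getD, List.getElem?_eq_getElem hj]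
  simp [PySem.List.getElem_pyRange_one]

lemma pvP0_par (m : Int) (j : Nat) (hj : j < (PySem.List.pyRange 0 (m+1) 1).length) :
    pvPar (PySem.List.pyRange 0 (m+1) 1) j = j := by
  unfold pvPar
  rw [pvP0_getD m j hj]
  simp

lemma pvP0_wf (m : Int) : pvWf (PySem.List.pyRange 0 (m+1) 1) := by
  constructor
  · intro j hj
    rw [pvP0_getD m j hj]
    omega
  · intro j hj
    exact ⟨0, by simpa using pvP0_par m j hj⟩

lemma pvP0_root (m : Int) (j : Nat) (hj : j < (PySem.List.pyRange 0 (m+1) 1).length) :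
    pvRoot (PySem.List.pyRange 0 (m+1) 1) j = j :=
  Function.iterate_fixed (pvP0_par m j hj) _

lemma pvP0_tracks (m : Int) : pvTracks (PySem.List.pyRange 0 (m+1) 1) (fun _ _ => False) := by
  intro a b ha hb
  rw [pvP0_root m a ha, pvP0_root m b hb, pvEgen_empty]


-- ===== B-side: trial-division factorisation =====
lemma pvDvd_cast (d x : Int) (hd : 0 ≤ d) (hx : 0 ≤ x) : (d.toNat ∣ x.toNat) ↔ d ∣ x := by
  rw [← Int.natCast_dvd_natCast]
  rw [Int.toNat_of_nonneg hd, Int.toNat_of_nonneg hx]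

lemma pvNrm_nonneg (len : Nat) (u : Int) (hu : 0 ≤ u) : pvNrm len u = u.toNat := by
  simp [pvNrm]
  omega

lemma pvTracks_iff (p : List Int) (r s : Nat → Nat → Prop) (ht : pvTracks p r)
    (h : ∀ u w, r u w ↔ s u w) : pvTracks p s := by
  intro a b ha hb
  rw [ht a b ha hb]
  exact pvEgen_iff r s h a b

lemma pvStrip_spec : ∀ (fuel : Nat) (x d : Int), 0 < x → 2 ≤ d → x.toNat < fuel →
    0 < pvStrip fuel x d ∧ (pvStrip fuel x d).toNat ∣ x.toNat ∧
      ¬ (d.toNat ∣ (pvStrip fuel x d).toNat) ∧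
      (Nat.Prime d.toNat → ∀ q : Nat, q.Prime → q ≠ d.toNat →
        (q ∣ (pvStrip fuel x d).toNat ↔ q ∣ x.toNat)) ∧
      pvStrip fuel x d ≤ x := by
  intro fuel
  induction fuel with
  | zero => intro x d hx hd hf; omega
  | succ fuel ih =>
    intro x d hx hd hf
    simp only [pvStrip]
    by_cases hmod : PySem.Int.mod x d = 0
    · rw [if_pos hmod]
      have hdvd : d ∣ x := (PySem.Int.mod_eq_zero_iff_dvd x d).mp hmod
      have hdle : d ≤ x := Int.le_of_dvd hx hdvd
      have hq : PySem.Int.floordiv x d = x / d := PySem.Int.floordiv_eq_ediv_of_pos (by omega)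
      have hx' : 0 < x / d := by
        obtain ⟨c, rfl⟩ := hdvd
        rw [Int.mul_ediv_cancel_left _ (by omega)]
        nlinarith
      have hxtn : (x / d).toNat = x.toNat / d.toNat := by
        obtain ⟨xn, hxn⟩ := Int.eq_ofNat_of_zero_le (a := x) (by omega)
        obtain ⟨dn, hdn⟩ := Int.eq_ofNat_of_zero_le (a := d) (by omega)
        subst hxn hdn
        rfl
      have hlt : (x / d).toNat < x.toNat := by
        rw [hxtn]
        apply Nat.div_lt_self (by omega) (by omega)
      obtain ⟨h1, h2, h3, h4, h5⟩ := ih (x / d) d hx' hd (by omega)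
      rw [hq]
      have hdivdvd : (x / d).toNat ∣ x.toNat :=
        (pvDvd_cast (x / d) x (by omega) (by omega)).mpr (Int.ediv_dvd_of_dvd hdvd)
      refine ⟨h1, h2.trans hdivdvd, h3, ?_, by omega⟩
      intro hdp q hqp hqd
      rw [h4 hdp q hqp hqd]
      constructor
      · intro h
        exact h.trans hdivdvd
      · intro h
        -- q ∣ x = d * (x/d), q prime, q ≠ d ⇒ q ∣ x/d
        have hdn : d.toNat ∣ x.toNat := (pvDvd_cast d x (by omega) (by omega)).mpr hdvd
        have hxeq : x.toNat = d.toNat * (x / d).toNat := by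
          rw [hxtn]
          exact (Nat.mul_div_cancel' hdn).symm
        rw [hxeq] at h
        rcases (Nat.Prime.dvd_mul hqp).mp h with h | h
        · exact absurd ((Nat.prime_dvd_prime_iff_eq hqp hdp).mp h) hqd
        · exact h
    · rw [if_neg hmod]
      have hnd : ¬ d ∣ x := fun h => hmod ((PySem.Int.mod_eq_zero_iff_dvd x d).mpr h)
      refine ⟨hx, dvd_rfl, ?_, fun _ q _ _ => Iff.rfl, le_rfl⟩
      rw [pvDvd_cast d x (by omega) (by omega)]
      exact hnd


def pvEdgeV (v : Int) (u w : Nat) : Prop :=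
  2 ≤ v ∧ u = v.toNat ∧ Nat.Prime w ∧ w ∣ v.toNat

lemma pvFactorLoop_spec : ∀ (fuel : Nat) (p : List Int) (r : Nat → Nat → Prop) (v x d : Int),
    pvWf p →
    pvTracks p (fun u w => r u w ∨
      (2 ≤ v ∧ u = v.toNat ∧ Nat.Prime w ∧ w ∣ v.toNat ∧ ¬ w ∣ x.toNat)) →
    2 ≤ v → v < (p.length:Int) → 0 < x → x.toNat ∣ v.toNat → 2 ≤ d →
    (∀ q : Nat, Nat.Prime q → q ∣ x.toNat → d ≤ (q:Int)) →
    (x + 2 - d).toNat < fuel →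
    (pvFactorLoop fuel p v x d).1.length = p.length ∧ pvWf (pvFactorLoop fuel p v x d).1 ∧
      0 < (pvFactorLoop fuel p v x d).2 ∧ (pvFactorLoop fuel p v x d).2.toNat ∣ v.toNat ∧
      (1 < (pvFactorLoop fuel p v x d).2 → Nat.Prime (pvFactorLoop fuel p v x d).2.toNat) ∧
      pvTracks (pvFactorLoop fuel p v x d).1 (fun u w => r u w ∨
        (2 ≤ v ∧ u = v.toNat ∧ Nat.Prime w ∧ w ∣ v.toNat ∧
          ¬ w ∣ (pvFactorLoop fuel p v x d).2.toNat)) := by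
  intro fuel
  induction fuel with
  | zero =>
    intro p r v x d hw ht hv hvlen hx hxv hd hfact hfuel
    omega
  | succ fuel ih =>
    intro p r v x d hw ht hv hvlen hx hxv hd hfact hfuel
    have hvn : 0 < v.toNat := by omega
    have hxlev : x ≤ v := by
      have := Nat.le_of_dvd hvn hxv
      omega
    simp only [pvFactorLoop]
    by_cases hdx : d * d ≤ x
    · rw [if_pos hdx]
      have h2d : 2 * d ≤ d * d := by nlinarith
      have hdlex : d ≤ x := by omega
      by_cases hmod : PySem.Int.mod x d = 0
      · rw [if_pos hmod]
        have hdvd : d ∣ x := (PySem.Int.mod_eq_zero_iff_dvd x d).mp hmod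
        have hdvdn : d.toNat ∣ x.toNat := (pvDvd_cast d x (by omega) (by omega)).mpr hdvd
        -- d is prime: every prime factor of x is ≥ d, and d divides x
        have hdp : Nat.Prime d.toNat := by
          by_contra hnp
          have hne1 : d.toNat ≠ 1 := by omega
          have hq0p : Nat.Prime d.toNat.minFac := Nat.minFac_prime hne1
          have hq0d : d.toNat.minFac ∣ x.toNat := (Nat.minFac_dvd d.toNat).trans hdvdn
          have hge := hfact _ hq0p hq0d
          have hsq : d.toNat.minFac ^ 2 ≤ d.toNat := Nat.minFac_sq_le_self (by omega) hnp
          have h2 := hq0p.two_le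
          have hgeN : d.toNat ≤ d.toNat.minFac := by omega
          nlinarith [hsq, hgeN, h2]
        -- union(v, d)
        obtain ⟨hul, huw, _⟩ := pvUnionB_spec p hw v d (by omega) (by exact hvlen)
          (by omega) (by omega)
        have htu := pvTracks_unionB p hw _ ht v d (by omega) (by exact hvlen) (by omega) (by omega)
        -- strip x by d
        obtain ⟨hs1, hs2, hs3, hs4, hs5⟩ := pvStrip_spec (x.toNat + 1) x d hx hd (by omega)
        set x1 := pvStrip (x.toNat + 1) x d with hx1
        -- reshape the tracked relation
        have htu' : pvTracks (pvUnionB p v d) (fun u w => r u w ∨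
            (2 ≤ v ∧ u = v.toNat ∧ Nat.Prime w ∧ w ∣ v.toNat ∧ ¬ w ∣ x1.toNat)) := by
          apply pvTracks_iff _ _ _ htu
          intro u w
          rw [pvNrm_nonneg p.length v (by omega), pvNrm_nonneg p.length d (by omega)]
          constructor
          · rintro ((h | ⟨h1, h2, h3, h4, h5'⟩) | ⟨hu, hwd⟩)
            · exact Or.inl h
            · exact Or.inr ⟨h1, h2, h3, h4, fun hc => h5' (hc.trans hs2)⟩
            · subst hu hwd
              exact Or.inr ⟨hv, rfl, hdp, hdvdn.trans hxv, hs3⟩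
          · rintro (h | ⟨h1, h2, h3, h4, h5'⟩)
            · exact Or.inl (Or.inl h)
            · by_cases hwd : w = d.toNat
              · exact Or.inr ⟨h2, hwd⟩
              · refine Or.inl (Or.inr ⟨h1, h2, h3, h4, ?_⟩)
                rw [← hs4 hdp w h3 hwd]
                exact h5'
        have hfact' : ∀ q : Nat, Nat.Prime q → q ∣ x1.toNat → d + 1 ≤ (q:Int) := by
          intro q hqp hqx1
          have hqx : q ∣ x.toNat := hqx1.trans hs2
          have := hfact q hqp hqx
          have hqd : q ≠ d.toNat := by
            intro hqd
            rw [hqd] at hqx1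
            exact hs3 hqx1
          omega
        have := ih (pvUnionB p v d) r v x1 (d+1) huw htu'
          hv (by rw [hul]; exact hvlen) hs1 (hs2.trans hxv) (by omega) hfact' (by omega)
        rwa [hul] at this
      · rw [if_neg hmod]
        have hnd : ¬ d ∣ x := fun h => hmod ((PySem.Int.mod_eq_zero_iff_dvd x d).mpr h)
        have hfact' : ∀ q : Nat, Nat.Prime q → q ∣ x.toNat → d + 1 ≤ (q:Int) := by
          intro q hqp hqx
          have := hfact q hqp hqx
          have hqd : q ≠ d.toNat := by
            intro hqd
            apply hnd
            rw [← pvDvd_cast d x (by omega) (by omega), ← hqd]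
            exact hqx
          omega
        exact ih p r v x (d+1) hw ht hv hvlen hx hxv (by omega) hfact' (by omega)
    · rw [if_neg hdx]
      refine ⟨rfl, hw, hx, hxv, ?_, ht⟩
      intro hx1
      by_contra hnp
      have hne1 : x.toNat ≠ 1 := by omega
      have hq0p : Nat.Prime x.toNat.minFac := Nat.minFac_prime hne1
      have hq0d : x.toNat.minFac ∣ x.toNat := Nat.minFac_dvd x.toNat
      have hge := hfact _ hq0p hq0d
      have hsq : x.toNat.minFac ^ 2 ≤ x.toNat := Nat.minFac_sq_le_self (by omega) hnp
      have hxd : x < d * d := by omega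
      have hdn : ((d.toNat : Nat) : Int) = d := Int.toNat_of_nonneg (by omega)
      have hge' : d.toNat ≤ x.toNat.minFac := by omega
      have : d.toNat * d.toNat ≤ x.toNat.minFac * x.toNat.minFac :=
        Nat.mul_le_mul hge' hge'
      have hxn : x.toNat < d.toNat * d.toNat := by
        have : (x.toNat : Int) = x := Int.toNat_of_nonneg (by omega)
        nlinarith [hxd]
      nlinarith [hsq]


def pvEdgesB (S : List Int) (u w : Nat) : Prop := ∃ v ∈ S, pvEdgeV v u w

lemma pvProcessV (p : List Int) (r : Nat → Nat → Prop) (hw : pvWf p) (ht : pvTracks p r)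
    (v : Int) (hvlen : v < (p.length:Int)) :
    (if 1 < (pvFactorLoop (v.toNat + 2) p v v 2).2 then
        pvUnionB (pvFactorLoop (v.toNat + 2) p v v 2).1 v (pvFactorLoop (v.toNat + 2) p v v 2).2
      else (pvFactorLoop (v.toNat + 2) p v v 2).1).length = p.length ∧
    pvWf (if 1 < (pvFactorLoop (v.toNat + 2) p v v 2).2 then
        pvUnionB (pvFactorLoop (v.toNat + 2) p v v 2).1 v (pvFactorLoop (v.toNat + 2) p v v 2).2
      else (pvFactorLoop (v.toNat + 2) p v v 2).1) ∧
    pvTracks (if 1 < (pvFactorLoop (v.toNat + 2) p v v 2).2 then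
        pvUnionB (pvFactorLoop (v.toNat + 2) p v v 2).1 v (pvFactorLoop (v.toNat + 2) p v v 2).2
      else (pvFactorLoop (v.toNat + 2) p v v 2).1)
      (fun u w => r u w ∨ pvEdgeV v u w) := by
  by_cases hv : 2 ≤ v
  · -- real factorisation
    have ht0 : pvTracks p (fun u w => r u w ∨
        (2 ≤ v ∧ u = v.toNat ∧ Nat.Prime w ∧ w ∣ v.toNat ∧ ¬ w ∣ v.toNat)) := by
      apply pvTracks_iff _ _ _ ht
      intro u w
      constructor
      · exact Or.inl
      · rintro (h | ⟨_, _, _, h4, h5⟩)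
        · exact h
        · exact absurd h4 h5
    obtain ⟨hl, hwf, hpos, hdvd, hprime, htr⟩ := pvFactorLoop_spec (v.toNat + 2) p r v v 2
      hw ht0 hv hvlen (by omega) dvd_rfl (by omega)
      (fun q hq _ => by exact_mod_cast hq.two_le) (by omega)
    set res := pvFactorLoop (v.toNat + 2) p v v 2 with hres
    by_cases h1 : 1 < res.2
    · rw [if_pos h1]
      have hP : Nat.Prime res.2.toNat := hprime h1
      have hreslev : res.2 ≤ v := by
        have := Nat.le_of_dvd (by omega) hdvd
        omega
      obtain ⟨hul, huw, _⟩ := pvUnionB_spec res.1 hwf v res.2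
        (by rw [hl]; omega) (by rw [hl]; exact hvlen) (by rw [hl]; omega)
        (by rw [hl]; omega)
      have htu := pvTracks_unionB res.1 hwf _ htr v res.2
        (by rw [hl]; omega) (by rw [hl]; exact hvlen) (by rw [hl]; omega)
        (by rw [hl]; omega)
      refine ⟨by rw [hul, hl], huw, ?_⟩
      apply pvTracks_iff _ _ _ htu
      intro u w
      rw [pvNrm_nonneg res.1.length v (by omega), pvNrm_nonneg res.1.length res.2 (by omega)]
      constructor
      · rintro ((h | ⟨h1', h2', h3', h4', _⟩) | ⟨hu, hweq⟩)
        · exact Or.inl h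
        · exact Or.inr ⟨h1', h2', h3', h4'⟩
        · subst hu hweq
          exact Or.inr ⟨hv, rfl, hP, hdvd⟩
      · rintro (h | ⟨h1', h2', h3', h4'⟩)
        · exact Or.inl (Or.inl h)
        · by_cases hwP : w = res.2.toNat
          · exact Or.inr ⟨h2', hwP⟩
          · refine Or.inl (Or.inr ⟨h1', h2', h3', h4', ?_⟩)
            intro hc
            exact hwP ((Nat.prime_dvd_prime_iff_eq h3' hP).mp hc)
    · rw [if_neg h1]
      refine ⟨hl, hwf, ?_⟩
      apply pvTracks_iff _ _ _ htr
      intro u w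
      have hres1 : res.2.toNat = 1 := by omega
      rw [hres1]
      constructor
      · rintro (h | ⟨h1', h2', h3', h4', _⟩)
        · exact Or.inl h
        · exact Or.inr ⟨h1', h2', h3', h4'⟩
      · rintro (h | ⟨h1', h2', h3', h4'⟩)
        · exact Or.inl h
        · exact Or.inr ⟨h1', h2', h3', h4', fun hc => h3'.one_lt.ne' (Nat.eq_one_of_dvd_one hc)⟩
  · -- v ≤ 1: the loop does nothing and contributes no edges
    have hunfold : pvFactorLoop (v.toNat + 2) p v v 2 = (p, v) := by
      show pvFactorLoop (v.toNat + 1 + 1) p v v 2 = (p, v)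
      simp only [pvFactorLoop]
      rw [if_neg (by omega)]
    rw [hunfold]
    simp only
    rw [if_neg (by omega : ¬ (1:Int) < v)]
    refine ⟨rfl, hw, ?_⟩
    apply pvTracks_iff _ _ _ ht
    intro u w
    constructor
    · exact Or.inl
    · rintro (h | ⟨h1', _⟩)
      · exact h
      · omega


lemma pvFoldB : ∀ (S : List Int) (p : List Int) (r : Nat → Nat → Prop), pvWf p → pvTracks p r →
    (∀ v ∈ S, v < (p.length:Int)) →
    (S.foldl (fun p v =>
        let r := pvFactorLoop (v.toNat + 2) p v v 2
        if 1 < r.2 then pvUnionB r.1 v r.2 else r.1) p).length = p.length ∧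
    pvWf (S.foldl (fun p v =>
        let r := pvFactorLoop (v.toNat + 2) p v v 2
        if 1 < r.2 then pvUnionB r.1 v r.2 else r.1) p) ∧
    pvTracks (S.foldl (fun p v =>
        let r := pvFactorLoop (v.toNat + 2) p v v 2
        if 1 < r.2 then pvUnionB r.1 v r.2 else r.1) p)
      (fun u w => r u w ∨ pvEdgesB S u w)
  | [], p, r, hw, ht, _ => by
    refine ⟨rfl, hw, ?_⟩
    apply pvTracks_iff _ _ _ ht
    intro u w
    simp [pvEdgesB]
  | v :: S, p, r, hw, ht, hb => by
    rw [List.foldl_cons]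
    obtain ⟨hl, hwf, htr⟩ := pvProcessV p r hw ht v (hb v List.mem_cons_self)
    have hstep : (let r := pvFactorLoop (v.toNat + 2) p v v 2
        if 1 < r.2 then pvUnionB r.1 v r.2 else r.1) =
        (if 1 < (pvFactorLoop (v.toNat + 2) p v v 2).2 then
          pvUnionB (pvFactorLoop (v.toNat + 2) p v v 2).1 v (pvFactorLoop (v.toNat + 2) p v v 2).2
        else (pvFactorLoop (v.toNat + 2) p v v 2).1) := rfl
    rw [hstep]
    obtain ⟨hl2, hwf2, htr2⟩ := pvFoldB S _ _ hwf htr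
      (fun v' hv' => by rw [hl]; exact hb v' (List.mem_cons_of_mem _ hv'))
    refine ⟨by rw [hl2, hl], hwf2, ?_⟩
    apply pvTracks_iff _ _ _ htr2
    intro u w
    constructor
    · rintro ((h | h) | ⟨v', hv', he⟩)
      · exact Or.inl h
      · exact Or.inr ⟨v, List.mem_cons_self, h⟩
      · exact Or.inr ⟨v', List.mem_cons_of_mem _ hv', he⟩
    · rintro (h | ⟨v', hv', he⟩)
      · exact Or.inl (Or.inl h)
      · rcases List.mem_cons.mp hv' with rfl | hv'
        · exact Or.inl (Or.inr he)
        · exact Or.inr ⟨v', hv', he⟩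


-- ===== A-side: sieve + unions =====
def pvSCond (K : Int) (j : Nat) : Prop :=
  j < 2 ∨ ∃ q : Nat, Nat.Prime q ∧ (q:Int) < K ∧ q ∣ j ∧ 2*q ≤ j

def pvSieveOK (n : Nat) (K : Int) (s : List Int) : Prop :=
  s.length = n ∧ ∀ j, j < n → (pvSCond K j → s.getD j 0 = 0) ∧ (¬ pvSCond K j → s.getD j 0 = 1)

def pvEdgesA (seen : List Int) (K : Int) (u w : Nat) : Prop :=
  Nat.Prime u ∧ (u:Int) < K ∧ u ∣ w ∧ 2*u ≤ w ∧ ((w:Int) ∈ seen)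

lemma pvGetD_set (l : List Int) (i j : Nat) (v : Int) (hi : i < l.length) :
    (l.set i v).getD j 0 = if j = i then v else l.getD j 0 := by
  by_cases hj : j = i
  · subst hj
    simp [List.getD, hi]
  · simp [List.getD, List.getElem?_set_ne (fun h => hj h.symm), hj]

lemma pvRange_pos_nil (a b s : Int) (hs : 0 < s) (h : b ≤ a) :
    PySem.List.pyRange a b s = [] := by
  rw [PySem.List.pyRange_of_pos a b hs, if_neg (by omega)]
  simp

lemma pvRange_pos_cons (a b s : Int) (hs : 0 < s) (h : a < b) :
    PySem.List.pyRange a b s = a :: PySem.List.pyRange (a+s) b s := by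
  by_cases hab : a + s < b
  · rw [PySem.List.pyRange_of_pos a b hs, PySem.List.pyRange_of_pos (a+s) b hs,
      if_pos h, if_pos hab]
    have hcount : ((b - a + s - 1) / s).toNat = ((b - (a+s) + s - 1) / s).toNat + 1 := by
      have h1 : b - a + s - 1 = (b - (a+s) + s - 1) + 1 * s := by ring
      have h2 : (b - a + s - 1) / s = (b - (a+s) + s - 1) / s + 1 := by
        rw [h1, Int.add_mul_ediv_right _ _ (by omega)]
      have h3 : 0 ≤ (b - (a+s) + s - 1) / s := by
        have : 0 ≤ b - (a+s) + s - 1 := by omega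
        exact Int.ediv_nonneg this (by omega)
      omega
    rw [hcount, List.range_succ_eq_map]
    simp only [List.map_cons, List.map_map]
    congr 1
    · simp
    · apply List.map_congr_left
      intro i _
      simp only [Function.comp]
      push_cast
      ring
  · have hcount1 : ((b - a + s - 1) / s) = 1 := by
      have h1 : b - a + s - 1 = (b - a - 1) + 1 * s := by ring
      have h2 : (b - a - 1) / s = 0 := Int.ediv_eq_zero_of_lt (by omega) (by omega)
      rw [h1, Int.add_mul_ediv_right _ _ (by omega), h2]
      omega
    rw [pvRange_pos_nil (a+s) b s hs (by omega), PySem.List.pyRange_of_pos a b hs, if_pos h,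
      hcount1]
    simp

lemma pvPrime_of_unmarked (k : Nat) (h2 : 2 ≤ k)
    (h : ¬ ∃ q : Nat, Nat.Prime q ∧ (q:Int) < (k:Int) ∧ q ∣ k ∧ 2*q ≤ k) : Nat.Prime k := by
  by_contra hnp
  apply h
  have hne1 : k ≠ 1 := by omega
  have hq0p : Nat.Prime k.minFac := Nat.minFac_prime hne1
  have hsq : k.minFac ^ 2 ≤ k := Nat.minFac_sq_le_self (by omega) hnp
  have h2q := hq0p.two_le
  have h2k : 2 * k.minFac ≤ k := by nlinarith
  exact ⟨k.minFac, hq0p, by exact_mod_cast (by omega : k.minFac < k), Nat.minFac_dvd k, h2k⟩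

lemma pvSieve1_OK (m : Int) (hm : 1 ≤ m) :
    pvSieveOK ((m+1).toNat) 0
      (PySem.List.pySetD (PySem.List.pySetD (List.replicate ((m+1).toNat) 1) 0 0) 1 0) := by
  have hn : 2 ≤ (m+1).toNat := by omega
  have hlen0 : (List.replicate ((m+1).toNat) (1:Int)).length = (m+1).toNat := by simp
  have hs0 : PySem.List.pySetD (List.replicate ((m+1).toNat) (1:Int)) 0 0
      = (List.replicate ((m+1).toNat) (1:Int)).set 0 0 := by
    rw [pvSetD_nrm _ _ _ (by rw [hlen0]; omega) (by rw [hlen0]; exact_mod_cast by omega),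
      pvNrm_nonneg _ _ (by omega)]
    rfl
  have hlen1 : ((List.replicate ((m+1).toNat) (1:Int)).set 0 0).length = (m+1).toNat := by simp
  have hs1 : PySem.List.pySetD ((List.replicate ((m+1).toNat) (1:Int)).set 0 0) 1 0
      = ((List.replicate ((m+1).toNat) (1:Int)).set 0 0).set 1 0 := by
    rw [pvSetD_nrm _ _ _ (by rw [hlen1]; omega) (by rw [hlen1]; exact_mod_cast by omega),
      pvNrm_nonneg _ _ (by omega)]
    rfl
  rw [hs0, hs1]
  constructor
  · simp
  · intro j hj
    constructor
    · intro hc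
      rcases hc with hc | ⟨q, hqp, hqk, _, _⟩
      · rw [pvGetD_set _ _ _ _ (by rw [hlen1]; omega), pvGetD_set _ _ _ _ (by rw [hlen0]; omega)]
        split_ifs <;> first | rfl | omega
      · have := hqp.two_le
        omega
    · intro hc
      have hj2 : 2 ≤ j := by
        by_contra h
        exact hc (Or.inl (by omega))
      rw [pvGetD_set _ _ _ _ (by rw [hlen1]; omega), pvGetD_set _ _ _ _ (by rw [hlen0]; omega),
        if_neg (by omega), if_neg (by omega)]
      simp [List.getD, hj]


lemma pvInnerA : ∀ (c : Nat) (m k x0 K : Int) (seen : List Int) (r0 : Nat → Nat → Prop)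
    (sieve p : List Int),
    1 ≤ m → 2 ≤ k → k ∣ x0 → 2*k ≤ x0 →
    (∀ z ∈ seen, z ≤ m) →
    (m + 1 - x0).toNat ≤ c →
    sieve.length = (m+1).toNat →
    (∀ j, j < (m+1).toNat →
      ((pvSCond K j ∨ ((k ∣ (j:Int)) ∧ 2*k ≤ (j:Int) ∧ (j:Int) < x0)) → sieve.getD j 0 = 0) ∧
      (¬ (pvSCond K j ∨ ((k ∣ (j:Int)) ∧ 2*k ≤ (j:Int) ∧ (j:Int) < x0)) → sieve.getD j 0 = 1)) →
    p.length = (m+1).toNat → pvWf p →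
    pvTracks p (fun u w => r0 u w ∨
      (u = k.toNat ∧ (k ∣ (w:Int)) ∧ 2*k ≤ (w:Int) ∧ (w:Int) < x0 ∧ (w:Int) ∈ seen)) →
    ((PySem.List.pyRange x0 (m+1) k).foldl
        (fun (st2 : List Int × List Int) x =>
          let sieve := PySem.List.pySetD st2.1 x 0
          if PySem.Set.contains seen x then (sieve, pvUnionA st2.2 k x)
          else (sieve, st2.2)) (sieve, p)).1.length = (m+1).toNat ∧
    (∀ j, j < (m+1).toNat →
      ((pvSCond K j ∨ ((k ∣ (j:Int)) ∧ 2*k ≤ (j:Int))) →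
        ((PySem.List.pyRange x0 (m+1) k).foldl
          (fun (st2 : List Int × List Int) x =>
            let sieve := PySem.List.pySetD st2.1 x 0
            if PySem.Set.contains seen x then (sieve, pvUnionA st2.2 k x)
            else (sieve, st2.2)) (sieve, p)).1.getD j 0 = 0) ∧
      (¬ (pvSCond K j ∨ ((k ∣ (j:Int)) ∧ 2*k ≤ (j:Int))) →
        ((PySem.List.pyRange x0 (m+1) k).foldl
          (fun (st2 : List Int × List Int) x =>
            let sieve := PySem.List.pySetD st2.1 x 0
            if PySem.Set.contains seen x then (sieve, pvUnionA st2.2 k x)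
            else (sieve, st2.2)) (sieve, p)).1.getD j 0 = 1)) ∧
    ((PySem.List.pyRange x0 (m+1) k).foldl
        (fun (st2 : List Int × List Int) x =>
          let sieve := PySem.List.pySetD st2.1 x 0
          if PySem.Set.contains seen x then (sieve, pvUnionA st2.2 k x)
          else (sieve, st2.2)) (sieve, p)).2.length = (m+1).toNat ∧
    pvWf ((PySem.List.pyRange x0 (m+1) k).foldl
        (fun (st2 : List Int × List Int) x =>
          let sieve := PySem.List.pySetD st2.1 x 0
          if PySem.Set.contains seen x then (sieve, pvUnionA st2.2 k x)
          else (sieve, st2.2)) (sieve, p)).2 ∧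
    pvTracks ((PySem.List.pyRange x0 (m+1) k).foldl
        (fun (st2 : List Int × List Int) x =>
          let sieve := PySem.List.pySetD st2.1 x 0
          if PySem.Set.contains seen x then (sieve, pvUnionA st2.2 k x)
          else (sieve, st2.2)) (sieve, p)).2
      (fun u w => r0 u w ∨
        (u = k.toNat ∧ (k ∣ (w:Int)) ∧ 2*k ≤ (w:Int) ∧ (w:Int) ∈ seen)) := by
  intro c
  induction c with
  | zero =>
    intro m k x0 K seen r0 sieve p hm hk2 hkd hx0 hseen hfuel hsl hsv hpl hw ht
    have hx0m : m + 1 ≤ x0 := by omega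
    rw [pvRange_pos_nil x0 (m+1) k (by omega) hx0m]
    simp only [List.foldl_nil]
    refine ⟨hsl, ?_, hpl, hw, ?_⟩
    · intro j hj
      have hjm : (j:Int) < x0 := by omega
      constructor
      · intro h
        exact (hsv j hj).1 (by tauto)
      · intro h
        exact (hsv j hj).2 (by tauto)
    · apply pvTracks_iff _ _ _ ht
      intro u w
      constructor
      · rintro (h | ⟨h1, h2, h3, _, h5⟩)
        · exact Or.inl h
        · exact Or.inr ⟨h1, h2, h3, h5⟩
      · rintro (h | ⟨h1, h2, h3, h5⟩)
        · exact Or.inl h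
        · have := hseen _ h5
          exact Or.inr ⟨h1, h2, h3, by omega, h5⟩
  | succ c ih =>
    intro m k x0 K seen r0 sieve p hm hk2 hkd hx0 hseen hfuel hsl hsv hpl hw ht
    by_cases hx0m : m + 1 ≤ x0
    · -- same as the base case
      rw [pvRange_pos_nil x0 (m+1) k (by omega) hx0m]
      simp only [List.foldl_nil]
      refine ⟨hsl, ?_, hpl, hw, ?_⟩
      · intro j hj
        have hjm : (j:Int) < x0 := by omega
        constructor
        · intro h
          exact (hsv j hj).1 (by tauto)
        · intro h
          exact (hsv j hj).2 (by tauto)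
      · apply pvTracks_iff _ _ _ ht
        intro u w
        constructor
        · rintro (h | ⟨h1, h2, h3, _, h5⟩)
          · exact Or.inl h
          · exact Or.inr ⟨h1, h2, h3, h5⟩
        · rintro (h | ⟨h1, h2, h3, h5⟩)
          · exact Or.inl h
          · have := hseen _ h5
            exact Or.inr ⟨h1, h2, h3, by omega, h5⟩
    · -- process multiple x0
      rw [pvRange_pos_cons x0 (m+1) k (by omega) (by omega), List.foldl_cons]
      have hcastn : (((m+1).toNat : Nat) : Int) = m + 1 := by omega
      have hsset : PySem.List.pySetD sieve x0 0 = sieve.set x0.toNat 0 := by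
        rw [pvSetD_nrm sieve x0 0 (by rw [hsl]; omega) (by rw [hsl]; omega),
          pvNrm_nonneg _ _ (by omega)]
      have hx0n : x0.toNat < (m+1).toNat := by omega
      -- the updated sieve satisfies the invariant advanced to x0 + k
      have hsv' : ∀ j, j < (m+1).toNat →
          ((pvSCond K j ∨ ((k ∣ (j:Int)) ∧ 2*k ≤ (j:Int) ∧ (j:Int) < x0 + k)) →
            (sieve.set x0.toNat 0).getD j 0 = 0) ∧
          (¬ (pvSCond K j ∨ ((k ∣ (j:Int)) ∧ 2*k ≤ (j:Int) ∧ (j:Int) < x0 + k)) →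
            (sieve.set x0.toNat 0).getD j 0 = 1) := by
        intro j hj
        rw [pvGetD_set sieve x0.toNat j 0 (by rw [hsl]; exact hx0n)]
        by_cases hjx : j = x0.toNat
        · rw [if_pos hjx]
          subst hjx
          constructor
          · intro _; rfl
          · intro h
            exact absurd (Or.inr ⟨by rwa [Int.toNat_of_nonneg (by omega)],
              by rw [Int.toNat_of_nonneg (by omega)]; omega,
              by rw [Int.toNat_of_nonneg (by omega)]; omega⟩) h
        · rw [if_neg hjx]
          have hkey : ((k ∣ (j:Int)) ∧ 2*k ≤ (j:Int) ∧ (j:Int) < x0 + k) ↔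
              ((k ∣ (j:Int)) ∧ 2*k ≤ (j:Int) ∧ (j:Int) < x0) := by
            constructor
            · rintro ⟨h1, h2, h3⟩
              refine ⟨h1, h2, ?_⟩
              by_contra hge
              -- x0 ≤ j < x0 + k and k ∣ j, k ∣ x0 ⇒ j = x0, contradicting j ≠ x0.toNat
              have hdiff : k ∣ ((j:Int) - x0) := dvd_sub h1 hkd
              have : (j:Int) - x0 = 0 := by
                rcases hdiff with ⟨e, he⟩
                have he1 : 0 ≤ e := by nlinarith
                have he2 : e < 1 := by nlinarith
                have he0 : e = 0 := by omega
                rw [he0, mul_zero] at he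
                omega
              exact hjx (by omega)
            · rintro ⟨h1, h2, h3⟩
              exact ⟨h1, h2, by omega⟩
          constructor
          · intro h
            exact (hsv j hj).1 (by tauto)
          · intro h
            exact (hsv j hj).2 (by tauto)
      by_cases hcont : PySem.Set.contains seen x0 = true
      · rw [if_pos hcont]
        have hx0mem : x0 ∈ seen := by
          simpa [PySem.Set.contains] using hcont
        have htu := pvTracks_unionA p hw _ ht k x0 (by rw [hpl]; omega)
          (by rw [hpl]; omega) (by rw [hpl]; omega) (by rw [hpl]; omega)
        obtain ⟨hul, huw, _⟩ := pvUnionA_spec p hw k x0 (by rw [hpl]; omega)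
          (by rw [hpl]; omega) (by rw [hpl]; omega) (by rw [hpl]; omega)
        have htu' : pvTracks (pvUnionA p k x0) (fun u w => r0 u w ∨
            (u = k.toNat ∧ (k ∣ (w:Int)) ∧ 2*k ≤ (w:Int) ∧ (w:Int) < x0 + k ∧ (w:Int) ∈ seen)) := by
          apply pvTracks_iff _ _ _ htu
          intro u w
          rw [pvNrm_nonneg p.length k (by omega), pvNrm_nonneg p.length x0 (by omega)]
          constructor
          · rintro ((h | ⟨h1, h2, h3, h4, h5⟩) | ⟨hu, hwx⟩)
            · exact Or.inl h
            · exact Or.inr ⟨h1, h2, h3, by omega, h5⟩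
            · subst hu hwx
              refine Or.inr ⟨rfl, by rwa [Int.toNat_of_nonneg (by omega)],
                by rw [Int.toNat_of_nonneg (by omega)]; omega,
                by rw [Int.toNat_of_nonneg (by omega)]; omega,
                by rwa [Int.toNat_of_nonneg (by omega)]⟩
          · rintro (h | ⟨h1, h2, h3, h4, h5⟩)
            · exact Or.inl (Or.inl h)
            · by_cases hwx : (w:Int) = x0
              · exact Or.inr ⟨h1, by omega⟩
              · refine Or.inl (Or.inr ⟨h1, h2, h3, ?_, h5⟩)
                by_contra hge
                have hdiff : k ∣ ((w:Int) - x0) := dvd_sub h2 hkd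
                have : (w:Int) - x0 = 0 := by
                  rcases hdiff with ⟨e, he⟩
                  have he1 : 0 ≤ e := by nlinarith
                  have he2 : e < 1 := by nlinarith
                  have he0 : e = 0 := by omega
                  rw [he0, mul_zero] at he
                  omega
                exact hwx (by omega)
        have := ih m k (x0 + k) K seen r0 (sieve.set x0.toNat 0) (pvUnionA p k x0)
          hm hk2 (by exact Dvd.dvd.add hkd dvd_rfl) (by omega) hseen (by omega)
          (by rw [List.length_set]; exact hsl) hsv' (by rw [hul]; exact hpl) huw htu'
        rw [hsset]
        exact this
      · rw [if_neg (by simpa using hcont)]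
        have hx0nmem : x0 ∉ seen := by
          intro hmem
          apply hcont
          simpa [PySem.Set.contains] using hmem
        have ht' : pvTracks p (fun u w => r0 u w ∨
            (u = k.toNat ∧ (k ∣ (w:Int)) ∧ 2*k ≤ (w:Int) ∧ (w:Int) < x0 + k ∧ (w:Int) ∈ seen)) := by
          apply pvTracks_iff _ _ _ ht
          intro u w
          constructor
          · rintro (h | ⟨h1, h2, h3, h4, h5⟩)
            · exact Or.inl h
            · exact Or.inr ⟨h1, h2, h3, by omega, h5⟩
          · rintro (h | ⟨h1, h2, h3, h4, h5⟩)
            · exact Or.inl h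
            · refine Or.inr ⟨h1, h2, h3, ?_, h5⟩
              by_cases hwx : (w:Int) = x0
              · exact absurd (hwx ▸ h5) hx0nmem
              · by_contra hge
                have hdiff : k ∣ ((w:Int) - x0) := dvd_sub h2 hkd
                have : (w:Int) - x0 = 0 := by
                  rcases hdiff with ⟨e, he⟩
                  have he1 : 0 ≤ e := by nlinarith
                  have he2 : e < 1 := by nlinarith
                  have he0 : e = 0 := by omega
                  rw [he0, mul_zero] at he
                  omega
                exact hwx (by omega)
        have := ih m k (x0 + k) K seen r0 (sieve.set x0.toNat 0) p
          hm hk2 (by exact Dvd.dvd.add hkd dvd_rfl) (by omega) hseen (by omega)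
          (by rw [List.length_set]; exact hsl) hsv' hpl hw ht'
        rw [hsset]
        exact this



lemma pvStepA (m : Int) (seen : List Int) (Kt : Nat) (sieve p : List Int)
    (hm : 1 ≤ m) (hseen : ∀ z ∈ seen, z ≤ m) (hK : (Kt:Int) ≤ PySem.Int.floordiv m 2)
    (hsl : sieve.length = (m+1).toNat)
    (hsv : ∀ j, j < (m+1).toNat → (pvSCond (Kt:Int) j → sieve.getD j 0 = 0) ∧
      (¬ pvSCond (Kt:Int) j → sieve.getD j 0 = 1))
    (hpl : p.length = (m+1).toNat) (hw : pvWf p)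
    (ht : pvTracks p (pvEdgesA seen (Kt:Int))) :
    (if PySem.List.pyGetD sieve ((Kt:Nat):Int) 0 ≠ 0 then
        (PySem.List.pyRange (2*((Kt:Nat):Int)) (m+1) ((Kt:Nat):Int)).foldl
          (fun (st2 : List Int × List Int) x =>
            let sv := PySem.List.pySetD st2.1 x 0
            if PySem.Set.contains seen x then (sv, pvUnionA st2.2 ((Kt:Nat):Int) x)
            else (sv, st2.2)) (sieve, p)
      else (sieve, p)).1.length = (m+1).toNat ∧
    (∀ j, j < (m+1).toNat →
      (pvSCond ((Kt:Int)+1) j → (if PySem.List.pyGetD sieve ((Kt:Nat):Int) 0 ≠ 0 then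
        (PySem.List.pyRange (2*((Kt:Nat):Int)) (m+1) ((Kt:Nat):Int)).foldl
          (fun (st2 : List Int × List Int) x =>
            let sv := PySem.List.pySetD st2.1 x 0
            if PySem.Set.contains seen x then (sv, pvUnionA st2.2 ((Kt:Nat):Int) x)
            else (sv, st2.2)) (sieve, p)
      else (sieve, p)).1.getD j 0 = 0) ∧
      (¬ pvSCond ((Kt:Int)+1) j → (if PySem.List.pyGetD sieve ((Kt:Nat):Int) 0 ≠ 0 then
        (PySem.List.pyRange (2*((Kt:Nat):Int)) (m+1) ((Kt:Nat):Int)).foldl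
          (fun (st2 : List Int × List Int) x =>
            let sv := PySem.List.pySetD st2.1 x 0
            if PySem.Set.contains seen x then (sv, pvUnionA st2.2 ((Kt:Nat):Int) x)
            else (sv, st2.2)) (sieve, p)
      else (sieve, p)).1.getD j 0 = 1)) ∧
    (if PySem.List.pyGetD sieve ((Kt:Nat):Int) 0 ≠ 0 then
        (PySem.List.pyRange (2*((Kt:Nat):Int)) (m+1) ((Kt:Nat):Int)).foldl
          (fun (st2 : List Int × List Int) x =>
            let sv := PySem.List.pySetD st2.1 x 0
            if PySem.Set.contains seen x then (sv, pvUnionA st2.2 ((Kt:Nat):Int) x)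
            else (sv, st2.2)) (sieve, p)
      else (sieve, p)).2.length = (m+1).toNat ∧
    pvWf (if PySem.List.pyGetD sieve ((Kt:Nat):Int) 0 ≠ 0 then
        (PySem.List.pyRange (2*((Kt:Nat):Int)) (m+1) ((Kt:Nat):Int)).foldl
          (fun (st2 : List Int × List Int) x =>
            let sv := PySem.List.pySetD st2.1 x 0
            if PySem.Set.contains seen x then (sv, pvUnionA st2.2 ((Kt:Nat):Int) x)
            else (sv, st2.2)) (sieve, p)
      else (sieve, p)).2 ∧
    pvTracks (if PySem.List.pyGetD sieve ((Kt:Nat):Int) 0 ≠ 0 then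
        (PySem.List.pyRange (2*((Kt:Nat):Int)) (m+1) ((Kt:Nat):Int)).foldl
          (fun (st2 : List Int × List Int) x =>
            let sv := PySem.List.pySetD st2.1 x 0
            if PySem.Set.contains seen x then (sv, pvUnionA st2.2 ((Kt:Nat):Int) x)
            else (sv, st2.2)) (sieve, p)
      else (sieve, p)).2
      (pvEdgesA seen ((Kt:Int)+1)) := by
  have hfd : 0 ≤ PySem.Int.floordiv m 2 := by
    rw [PySem.Int.floordiv_eq_ediv_of_pos (by omega)]
    exact Int.ediv_nonneg (by omega) (by omega)
  have hfdm : PySem.Int.floordiv m 2 ≤ m := by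
    rw [PySem.Int.floordiv_eq_ediv_of_pos (by omega)]
    exact Int.ediv_le_self 2 (by omega)
  have hKtn : Kt < (m+1).toNat := by omega
  by_cases hsc : pvSCond (Kt:Int) Kt
  · have hnp : ¬ (Nat.Prime Kt) ∨ Kt < 2 := by
      rcases hsc with h | ⟨q, hqp, hqk, hqd, hq2⟩
      · exact Or.inr h
      · left
        intro hp
        rcases (Nat.Prime.eq_one_or_self_of_dvd hp q hqd) with h1 | h1
        · have := hqp.two_le
          omega
        · omega
    have h0 := (hsv Kt hKtn).1 hsc
    rw [if_neg (by
      rw [PySem.List.pyGetD_natCast, h0]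
      simp)]
    have hcondiff : ∀ j, pvSCond ((Kt:Int)+1) j ↔ pvSCond (Kt:Int) j := by
      intro j
      constructor
      · rintro (h | ⟨q, hqp, hqk, hqd, hq2⟩)
        · exact Or.inl h
        · by_cases hqKt : q = Kt
          · subst hqKt
            rcases hnp with h | h
            · exact absurd hqp h
            · have := hqp.two_le
              omega
          · exact Or.inr ⟨q, hqp, by
              have : (q:Int) ≠ (Kt:Int) := by exact_mod_cast hqKt
              omega, hqd, hq2⟩
      · rintro (h | ⟨q, hqp, hqk, hqd, hq2⟩)
        · exact Or.inl h
        · exact Or.inr ⟨q, hqp, by omega, hqd, hq2⟩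
    refine ⟨hsl, ?_, hpl, hw, ?_⟩
    · intro j hj
      constructor
      · intro h
        exact (hsv j hj).1 ((hcondiff j).mp h)
      · intro h
        exact (hsv j hj).2 (fun hc => h ((hcondiff j).mpr hc))
    · apply pvTracks_iff _ _ _ ht
      intro u w
      unfold pvEdgesA
      constructor
      · rintro ⟨h1, h2, h3, h4, h5⟩
        exact ⟨h1, by omega, h3, h4, h5⟩
      · rintro ⟨h1, h2, h3, h4, h5⟩
        refine ⟨h1, ?_, h3, h4, h5⟩
        by_cases huKt : u = Kt
        · subst huKt
          rcases hnp with h | h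
          · exact absurd h1 h
          · have := h1.two_le
            omega
        · have : (u:Int) ≠ (Kt:Int) := by exact_mod_cast huKt
          omega
  · have hKt2 : 2 ≤ Kt := by
      by_contra h
      exact hsc (Or.inl (by omega))
    have hKtp : Nat.Prime Kt := by
      apply pvPrime_of_unmarked Kt hKt2
      intro ⟨q, hqp, hqk, hqd, hq2⟩
      exact hsc (Or.inr ⟨q, hqp, hqk, hqd, hq2⟩)
    have h1v := (hsv Kt hKtn).2 hsc
    rw [if_pos (by
      rw [PySem.List.pyGetD_natCast, h1v]
      simp)]
    have hsv0 : ∀ j, j < (m+1).toNat →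
        ((pvSCond (Kt:Int) j ∨ (((Kt:Int) ∣ (j:Int)) ∧ 2*(Kt:Int) ≤ (j:Int) ∧
          (j:Int) < 2*(Kt:Int))) → sieve.getD j 0 = 0) ∧
        (¬ (pvSCond (Kt:Int) j ∨ (((Kt:Int) ∣ (j:Int)) ∧ 2*(Kt:Int) ≤ (j:Int) ∧
          (j:Int) < 2*(Kt:Int))) → sieve.getD j 0 = 1) := by
      intro j hj
      constructor
      · rintro (h | ⟨_, h2, h3⟩)
        · exact (hsv j hj).1 h
        · omega
      · intro h
        exact (hsv j hj).2 (fun hc => h (Or.inl hc))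
    have ht0 : pvTracks p
        (fun u w => pvEdgesA seen (Kt:Int) u w ∨
          (u = ((Kt:Nat):Int).toNat ∧ (((Kt:Nat):Int) ∣ (w:Int)) ∧ 2*((Kt:Nat):Int) ≤ (w:Int) ∧
            (w:Int) < 2*((Kt:Nat):Int) ∧ (w:Int) ∈ seen)) := by
      apply pvTracks_iff _ _ _ ht
      intro u w
      constructor
      · exact Or.inl
      · rintro (h | ⟨_, _, h3, h4, _⟩)
        · exact h
        · omega
    obtain ⟨hsl', hsv', hpl', hw', ht'⟩ := pvInnerA ((m+1-2*(Kt:Int)).toNat) m ((Kt:Nat):Int)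
      (2*((Kt:Nat):Int)) ((Kt:Nat):Int) seen (pvEdgesA seen (Kt:Int)) sieve p
      hm (by exact_mod_cast hKt2) ⟨2, by ring⟩ le_rfl hseen le_rfl hsl hsv0 hpl hw ht0
    refine ⟨hsl', ?_, hpl', hw', ?_⟩
    · intro j hj
      have hiff : pvSCond ((Kt:Int)+1) j ↔
          (pvSCond (Kt:Int) j ∨ (((Kt:Int) ∣ (j:Int)) ∧ 2*(Kt:Int) ≤ (j:Int))) := by
        constructor
        · rintro (h | ⟨q, hqp, hqk, hqd, hq2⟩)
          · exact Or.inl (Or.inl h)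
          · by_cases hqKt : q = Kt
            · subst hqKt
              exact Or.inr ⟨by exact_mod_cast hqd, by exact_mod_cast hq2⟩
            · refine Or.inl (Or.inr ⟨q, hqp, by
                have : (q:Int) ≠ (Kt:Int) := by exact_mod_cast hqKt
                omega, hqd, hq2⟩)
        · rintro ((h | ⟨q, hqp, hqk, hqd, hq2⟩) | ⟨h1, h2⟩)
          · exact Or.inl h
          · exact Or.inr ⟨q, hqp, by omega, hqd, hq2⟩
          · exact Or.inr ⟨Kt, hKtp, by omega, by exact_mod_cast h1, by exact_mod_cast h2⟩
      constructor
      · intro h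
        exact (hsv' j hj).1 (hiff.mp h)
      · intro h
        exact (hsv' j hj).2 (fun hc => h (hiff.mpr hc))
    · apply pvTracks_iff _ _ _ ht'
      intro u w
      unfold pvEdgesA
      constructor
      · rintro (⟨h1, h2, h3, h4, h5⟩ | ⟨h1, h2, h3, h5⟩)
        · exact ⟨h1, by omega, h3, h4, h5⟩
        · rw [Int.toNat_natCast] at h1
          subst h1
          exact ⟨hKtp, by omega, by exact_mod_cast h2, by exact_mod_cast h3, h5⟩
      · rintro ⟨h1, h2, h3, h4, h5⟩
        by_cases huKt : u = Kt
        · subst huKt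
          refine Or.inr ⟨by rw [Int.toNat_natCast], by exact_mod_cast h3,
            by exact_mod_cast h4, h5⟩
        · refine Or.inl ⟨h1, ?_, h3, h4, h5⟩
          have : (u:Int) ≠ (Kt:Int) := by exact_mod_cast huKt
          omega


lemma pvOuterA : ∀ (Kt : Nat) (m : Int) (seen : List Int), 1 ≤ m → (∀ z ∈ seen, z ≤ m) →
    (Kt:Int) ≤ PySem.Int.floordiv m 2 + 1 →
    ((PySem.List.pyRange 0 (Kt:Int) 1).foldl
      (fun (st : List Int × List Int) k =>
        if PySem.List.pyGetD st.1 k 0 ≠ 0 then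
          (PySem.List.pyRange (2*k) (m+1) k).foldl
            (fun (st2 : List Int × List Int) x =>
              let sv := PySem.List.pySetD st2.1 x 0
              if PySem.Set.contains seen x then (sv, pvUnionA st2.2 k x)
              else (sv, st2.2)) st
        else st)
      (PySem.List.pySetD (PySem.List.pySetD (List.replicate ((m+1).toNat) 1) 0 0) 1 0,
        PySem.List.pyRange 0 (m+1) 1)).1.length = (m+1).toNat ∧
    (∀ j, j < (m+1).toNat →
      (pvSCond (Kt:Int) j → ((PySem.List.pyRange 0 (Kt:Int) 1).foldl
        (fun (st : List Int × List Int) k =>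
          if PySem.List.pyGetD st.1 k 0 ≠ 0 then
            (PySem.List.pyRange (2*k) (m+1) k).foldl
              (fun (st2 : List Int × List Int) x =>
                let sv := PySem.List.pySetD st2.1 x 0
                if PySem.Set.contains seen x then (sv, pvUnionA st2.2 k x)
                else (sv, st2.2)) st
          else st)
        (PySem.List.pySetD (PySem.List.pySetD (List.replicate ((m+1).toNat) 1) 0 0) 1 0,
          PySem.List.pyRange 0 (m+1) 1)).1.getD j 0 = 0) ∧
      (¬ pvSCond (Kt:Int) j → ((PySem.List.pyRange 0 (Kt:Int) 1).foldl
        (fun (st : List Int × List Int) k =>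
          if PySem.List.pyGetD st.1 k 0 ≠ 0 then
            (PySem.List.pyRange (2*k) (m+1) k).foldl
              (fun (st2 : List Int × List Int) x =>
                let sv := PySem.List.pySetD st2.1 x 0
                if PySem.Set.contains seen x then (sv, pvUnionA st2.2 k x)
                else (sv, st2.2)) st
          else st)
        (PySem.List.pySetD (PySem.List.pySetD (List.replicate ((m+1).toNat) 1) 0 0) 1 0,
          PySem.List.pyRange 0 (m+1) 1)).1.getD j 0 = 1)) ∧
    ((PySem.List.pyRange 0 (Kt:Int) 1).foldl
      (fun (st : List Int × List Int) k =>
        if PySem.List.pyGetD st.1 k 0 ≠ 0 then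
          (PySem.List.pyRange (2*k) (m+1) k).foldl
            (fun (st2 : List Int × List Int) x =>
              let sv := PySem.List.pySetD st2.1 x 0
              if PySem.Set.contains seen x then (sv, pvUnionA st2.2 k x)
              else (sv, st2.2)) st
        else st)
      (PySem.List.pySetD (PySem.List.pySetD (List.replicate ((m+1).toNat) 1) 0 0) 1 0,
        PySem.List.pyRange 0 (m+1) 1)).2.length = (m+1).toNat ∧
    pvWf ((PySem.List.pyRange 0 (Kt:Int) 1).foldl
      (fun (st : List Int × List Int) k =>
        if PySem.List.pyGetD st.1 k 0 ≠ 0 then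
          (PySem.List.pyRange (2*k) (m+1) k).foldl
            (fun (st2 : List Int × List Int) x =>
              let sv := PySem.List.pySetD st2.1 x 0
              if PySem.Set.contains seen x then (sv, pvUnionA st2.2 k x)
              else (sv, st2.2)) st
        else st)
      (PySem.List.pySetD (PySem.List.pySetD (List.replicate ((m+1).toNat) 1) 0 0) 1 0,
        PySem.List.pyRange 0 (m+1) 1)).2 ∧
    pvTracks ((PySem.List.pyRange 0 (Kt:Int) 1).foldl
      (fun (st : List Int × List Int) k =>
        if PySem.List.pyGetD st.1 k 0 ≠ 0 then
          (PySem.List.pyRange (2*k) (m+1) k).foldl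
            (fun (st2 : List Int × List Int) x =>
              let sv := PySem.List.pySetD st2.1 x 0
              if PySem.Set.contains seen x then (sv, pvUnionA st2.2 k x)
              else (sv, st2.2)) st
        else st)
      (PySem.List.pySetD (PySem.List.pySetD (List.replicate ((m+1).toNat) 1) 0 0) 1 0,
        PySem.List.pyRange 0 (m+1) 1)).2
      (pvEdgesA seen (Kt:Int)) := by
  intro Kt
  induction Kt with
  | zero =>
    intro m seen hm hseen _
    have hnil : PySem.List.pyRange 0 ((0:Nat):Int) 1 = [] :=
      PySem.List.pyRange_one_eq_nil (by simp)
    rw [hnil]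
    simp only [List.foldl_nil]
    obtain ⟨hsl, hsv⟩ := pvSieve1_OK m hm
    have hp0l : (PySem.List.pyRange 0 (m+1) 1).length = (m+1).toNat := by
      rw [PySem.List.length_pyRange_one]
      congr 1
      omega
    refine ⟨hsl, ?_, hp0l, pvP0_wf m, ?_⟩
    · intro j hj
      exact hsv j hj
    · have := pvP0_tracks m
      apply pvTracks_iff _ _ _ this
      intro u w
      constructor
      · exact False.elim
      · rintro ⟨_, hlt, _⟩
        have : (0:Int) ≤ (u:Int) := by positivity
        omega
  | succ Kt ih =>
    intro m seen hm hseen hK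
    have hcast : ((Kt+1 : Nat) : Int) = (Kt:Int) + 1 := by push_cast; ring
    have hsplit : PySem.List.pyRange 0 ((Kt:Int)+1) 1
        = PySem.List.pyRange 0 (Kt:Int) 1 ++ [(Kt:Int)] :=
      PySem.List.pyRange_one_succ_right (by positivity)
    rw [hcast, hsplit, List.foldl_append, List.foldl_cons, List.foldl_nil]
    obtain ⟨hsl, hsv, hpl, hw, ht⟩ := ih m seen hm hseen (by omega)
    exact pvStepA m seen Kt _ _ hm hseen (by omega) hsl hsv hpl hw ht


lemma pvEgen_le (r s : Nat → Nat → Prop) (h : ∀ u w, r u w → Relation.EqvGen s u w)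
    (a b : Nat) (hab : Relation.EqvGen r a b) : Relation.EqvGen s a b := by
  induction hab with
  | rel u v huv => exact h u v huv
  | refl u => exact Relation.EqvGen.refl u
  | symm u v _ ih => exact Relation.EqvGen.symm _ _ ih
  | trans u v w _ _ ih1 ih2 => exact Relation.EqvGen.trans _ _ _ ih1 ih2

lemma pvClosure_eq (seen : List Int) (m : Int) (hm : 1 ≤ m) (hseen : ∀ z ∈ seen, z ≤ m)
    (a b : Nat) :
    Relation.EqvGen (pvEdgesA seen (PySem.Int.floordiv m 2 + 1)) a b ↔
      Relation.EqvGen (pvEdgesB seen) a b := by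
  constructor
  · apply pvEgen_le
    rintro u w ⟨h1, _, h3, h4, h5⟩
    have hu2 := h1.two_le
    have hw4 : 4 ≤ w := by
      have := Nat.le_of_dvd (by omega) h3
      omega
    apply Relation.EqvGen.symm
    apply Relation.EqvGen.rel
    exact ⟨(w:Int), h5, by exact_mod_cast (show 2 ≤ w by omega),
      by rw [Int.toNat_natCast], h1, by rw [Int.toNat_natCast]; exact h3⟩
  · apply pvEgen_le
    rintro u w ⟨v, hv, h2v, hu, hwp, hwd⟩
    have hvm := hseen v hv
    by_cases hwu : w = u
    · subst hwu
      exact Relation.EqvGen.refl _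
    · have hw2 := hwp.two_le
      have hvu : v.toNat = u := hu.symm
      have hwdu : w ∣ u := by rw [← hvu]; exact hwd
      have hwu2 : 2*w ≤ u := by
        rcases hwdu with ⟨t, ht⟩
        have ht2 : 2 ≤ t := by
          by_contra h
          interval_cases t <;> omega
        nlinarith
      have hun : ((u:Nat):Int) = v := by omega
      have hfd : (w:Int) < PySem.Int.floordiv m 2 + 1 := by
        have h2w : (w:Int) * 2 ≤ m := by
          have hc : ((2*w : Nat) : Int) ≤ ((u:Nat):Int) := by exact_mod_cast hwu2
          push_cast at hc
          omega
        have := (PySem.Int.le_floordiv_iff_mul_le (a := m) (b := 2) (q := (w:Int)) (by omega)).mpr h2w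
        omega
      exact Relation.EqvGen.symm _ _ (Relation.EqvGen.rel _ _
        ⟨hwp, hfd, hwdu, hwu2, by rw [hun]; exact hv⟩)

-- ===== VERDICT (by name: the statement is the Claim_ definition above) =====
theorem gcdSort_spec : Claim_equal_gcdSort := by
  intro A _ hpre
  unfold Spec_gcdSort
  obtain ⟨hne, hpre1, hpre2⟩ := hpre
  cases hmax : PySem.List.max? A (fun v => v) with
  | none =>
    rw [hmax] at hpre1
    simp at hpre1
  | some m =>
    rw [hmax] at hpre1 hpre2
    simp only [Option.getD_some] at hpre1 hpre2
    have hup : ∀ x ∈ A, x ≤ m := fun x hx => PySem.List.max?_isMax hmax x hx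
    simp only [gcdSort, gcdSort_alt, hmax]
    have hfd0 : 0 ≤ PySem.Int.floordiv m 2 := by
      rw [PySem.Int.floordiv_eq_ediv_of_pos (by omega)]
      exact Int.ediv_nonneg (by omega) (by omega)
    have hcastK : (((PySem.Int.floordiv m 2 + 1).toNat : Nat) : Int)
        = PySem.Int.floordiv m 2 + 1 := by omega
    rw [← hcastK]
    have hseen : ∀ z ∈ PySem.Set.ofList A, z ≤ m := by
      intro z hz
      exact hup z ((PySem.Set.mem_ofList A z).mp hz)
    obtain ⟨hslA, _, hplA, hwA, htA⟩ := pvOuterA ((PySem.Int.floordiv m 2 + 1).toNat) m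
      (PySem.Set.ofList A) hpre1 hseen (by omega)
    have hp0l : (PySem.List.pyRange 0 (m+1) 1).length = (m+1).toNat := by
      rw [PySem.List.length_pyRange_one]
      congr 1
      omega
    obtain ⟨hplB, hwB, htB⟩ := pvFoldB (PySem.Set.ofList A) (PySem.List.pyRange 0 (m+1) 1)
      (fun _ _ => False) (pvP0_wf m) (pvP0_tracks m)
      (fun v hv => by
        rw [hp0l]
        have := hseen v hv
        omega)
    have htB' : pvTracks ((PySem.Set.ofList A).foldl
        (fun p v =>
          let r := pvFactorLoop (v.toNat + 2) p v v 2
          if 1 < r.2 then pvUnionB r.1 v r.2 else r.1) (PySem.List.pyRange 0 (m+1) 1))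
        (pvEdgesB (PySem.Set.ofList A)) := by
      apply pvTracks_iff _ _ _ htB
      intro u w
      constructor
      · rintro (h | h)
        · exact h.elim
        · exact h
      · exact Or.inr
    rw [hp0l] at hplB
    apply pvAllFind_eq _ _ _ hwA hwB (by rw [hplA, hplB])
    · intro a b ha hb
      rw [hplA] at ha hb
      rw [htA a b (by rwa [hplA]) (by rwa [hplA]),
        htB' a b (by rwa [hplB]) (by rwa [hplB]), hcastK]
      exact pvClosure_eq (PySem.Set.ofList A) m hpre1 hseen a b
    · intro ab hab
      obtain ⟨ha, hb⟩ := List.of_mem_zip hab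
      have hb' : ab.2 ∈ A := (PySem.List.mem_sorted A (fun v => v) false ab.2).mp hb
      have h1 := hpre2 ab.1 ha
      have h2 := hpre2 ab.2 hb'
      have h3 := hup ab.1 ha
      have h4 := hup ab.2 hb'
      rw [hplA]
      constructor
      · omega
      constructor
      · omega
      constructor
      · omega
      · omega
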